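-- pv_equiv track=rewrite | github.com/grapheneaffiliate/h4-polytopic-attention | solve_arc_b7.py | solve_50cb2852
-- ===== SOURCE A (Python) =====
-- def solve_50cb2852(grid):
--     h, w = len(grid), len(grid[0])
--     out = [row[:] for row in grid]
--
--     # Find connected components of non-zero cells
--     visited = [[False]*w for _ in range(h)]
--
--     def flood_fill(sr, sc, color):
--         cells = []
--         stack = [(sr, sc)]
--         while stack:
--             r, c = stack.pop()
--             if r < 0 or r >= h or c < 0 or c >= w:
--                 continue
--             if visited[r][c] or grid[r][c] != color:
--                 continue
--             visited[r][c] = True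
--             cells.append((r, c))
--             for dr, dc in [(-1,0),(1,0),(0,-1),(0,1)]:
--                 stack.append((r+dr, c+dc))
--         return cells
--
--     for r in range(h):
--         for c in range(w):
--             if grid[r][c] != 0 and not visited[r][c]:
--                 color = grid[r][c]
--                 cells = flood_fill(r, c, color)
--                 if len(cells) < 4:
--                     continue
--                 # Find bounding box
--                 rs = [r for r,c in cells]
--                 cs = [c for r,c in cells]
--                 min_r, max_r = min(rs), max(rs)
--                 min_c, max_c = min(cs), max(cs)
--                 # Fill interior with 8
--                 for ir in range(min_r+1, max_r):
--                     for ic in range(min_c+1, max_c):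
--                         out[ir][ic] = 8
--
--     return out
-- ===== SOURCE B (Python) =====
-- def solve_50cb2852(grid):
--     h, w = len(grid), len(grid[0])
--     # quick-find union-find: each non-zero cell starts as its own root
--     comp_id = {}
--     for r in range(h):
--         for c in range(w):
--             if grid[r][c] != 0:
--                 comp_id[(r, c)] = (r, c)
--     # union with right and down neighbours of the same color
--     for (r, c) in list(comp_id):
--         for nb in ((r + 1, c), (r, c + 1)):
--             if nb in comp_id and grid[nb[0]][nb[1]] == grid[r][c]:
--                 a, b = comp_id[(r, c)], comp_id[nb]
--                 if a != b:
--                     for k in comp_id: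
--                         if comp_id[k] == a:
--                             comp_id[k] = b
--     # group cells by root, keep bounding boxes of groups of size >= 4
--     groups = {}
--     for cell, root in comp_id.items():
--         groups.setdefault(root, []).append(cell)
--     boxes = []
--     for cells in groups.values():
--         if len(cells) >= 4:
--             rs = [r for r, _ in cells]
--             cs = [c for _, c in cells]
--             boxes.append((min(rs), max(rs), min(cs), max(cs)))
--     return [
--         [8 if any(b0 < r < b1 and b2 < i < b3 for (b0, b1, b2, b3) in boxes) else v
--          for i, v in enumerate(row)]
--         for r, row in enumerate(grid)
--     ]
-- ===== Notes on version B (the rewrite author's own statement) =====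
-- stated objective: alternative
-- what changed: Replaces A's DFS flood-fill with shared visited matrix and in-place interior filling by a quick-find union-find over the non-zero cells (union with right/down same-color neighbours, group cells by root), and builds the output row-by-row declaratively from the bounding boxes of the large groups.
import Mathlib
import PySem

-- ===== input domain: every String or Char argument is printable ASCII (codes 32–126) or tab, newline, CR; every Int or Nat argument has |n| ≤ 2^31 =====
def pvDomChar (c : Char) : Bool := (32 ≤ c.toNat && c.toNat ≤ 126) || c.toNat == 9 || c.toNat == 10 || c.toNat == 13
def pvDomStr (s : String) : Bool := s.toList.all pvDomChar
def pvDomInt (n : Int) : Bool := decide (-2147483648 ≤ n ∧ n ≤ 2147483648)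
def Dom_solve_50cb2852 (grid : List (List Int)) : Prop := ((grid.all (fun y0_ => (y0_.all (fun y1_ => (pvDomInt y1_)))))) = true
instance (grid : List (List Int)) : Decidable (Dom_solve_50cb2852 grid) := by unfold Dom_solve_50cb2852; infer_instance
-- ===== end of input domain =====

-- B replaces A's DFS flood-fill component discovery by a quick-find union–find over the
-- non-zero cells (union with right/down same-color neighbours, then group by root) and
-- builds the output declaratively from the bounding boxes; same return value, similar cost.

-- ===== PORT A =====
-- grid[r][c] for Int indices; exact whenever 0 ≤ r < len(grid) and 0 ≤ c < len(grid[r]),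
-- which every (guarded) use below satisfies
def gg (grid : List (List Int)) (r c : Int) : Int := (grid.getD r.toNat []).getD c.toNat 0

-- visited[r][c]; the default 'true' is only read on out-of-shape states the Python never
-- builds — it makes termination of the flood-fill loop manifest (totality guard)
def vget (v : List (List Bool)) (r c : Int) : Bool := (v.getD r.toNat []).getD c.toNat true

def vset (v : List (List Bool)) (r c : Int) : List (List Bool) :=
  v.set r.toNat ((v.getD r.toNat []).set c.toNat true)

def oset (o : List (List Int)) (r c x : Int) : List (List Int) :=
  o.set r.toNat ((o.getD r.toNat []).set c.toNat x)

def countFalse (v : List (List Bool)) : Nat := (v.map (fun row => row.count false)).sum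

theorem countFalse_set_lt (v : List (List Bool)) (n m : Nat)
    (h : (v.getD n []).getD m true = false) :
    countFalse (v.set n ((v.getD n []).set m true)) < countFalse v := by
  induction v generalizing n with
  | nil => simp at h
  | cons row rest ih =>
    cases n with
    | zero =>
      have hm : m < row.length := by
        by_contra hm
        simp [List.getD_eq_getElem?_getD, List.getElem?_eq_none (le_of_not_gt hm)] at h
      have hfalse : row[m] = false := by
        simpa [List.getD_eq_getElem?_getD, List.getElem?_eq_getElem hm] using h
      have : (row.set m true).count false < row.count false := by
        have h1 := List.count_set (a := true) (b := false) (l := row) (i := m) hm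
        have hpos : 0 < row.count false :=
          List.count_pos_iff.mpr (hfalse ▸ List.getElem_mem hm)
        simp [hfalse] at h1
        omega
      simp only [countFalse, List.getD_cons_zero, List.set_cons_zero, List.map_cons, List.sum_cons] at *
      omega
    | succ n =>
      have := ih n (by simpa using h)
      simp only [countFalse, List.getD_cons_succ, List.set_cons_succ, List.map_cons, List.sum_cons] at *
      omega

theorem vget_false_countFalse (v : List (List Bool)) (r c : Int) (h : vget v r c = false) :
    countFalse (vset v r c) < countFalse v :=
  countFalse_set_lt v r.toNat c.toNat h

def floodLoop (grid : List (List Int)) (h w color : Int) :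
    List (Int × Int) → List (List Bool) → List (Int × Int) → List (List Bool) × List (Int × Int)
  | [], visited, cells => (visited, cells)
  | (r, c) :: rest, visited, cells =>
    if r < 0 ∨ r ≥ h ∨ c < 0 ∨ c ≥ w then
      floodLoop grid h w color rest visited cells
    else if vget visited r c = true ∨ gg grid r c ≠ color then
      floodLoop grid h w color rest visited cells
    else
      floodLoop grid h w color ((r, c + 1) :: (r, c - 1) :: (r + 1, c) :: (r - 1, c) :: rest)
        (vset visited r c) (cells ++ [(r, c)])
  termination_by stack visited _ => (countFalse visited, stack.length)
  decreasing_by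
  · exact Prod.Lex.right _ (by simp)
  · exact Prod.Lex.right _ (by simp)
  · exact Prod.Lex.left _ _ (vget_false_countFalse visited r c (by simp_all))

-- the two nested fill loops 'for ir in range(r1, r2): for ic in range(c1, c2): out[ir][ic] = 8'
def fill2 (out : List (List Int)) (r1 r2 c1 c2 : Int) : List (List Int) :=
  (PySem.List.pyRange r1 r2 1).foldl
    (fun o ir => (PySem.List.pyRange c1 c2 1).foldl (fun o ic => oset o ir ic 8) o) out

def scanFinish (out : List (List Int)) (res : List (List Bool) × List (Int × Int)) :
    List (List Bool) × List (List Int) :=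
  if res.2.length < 4 then (res.1, out)
  else (res.1, fill2 out
    ((PySem.List.min? (res.2.map (·.1)) (fun v => v)).getD 0 + 1)
    ((PySem.List.max? (res.2.map (·.1)) (fun v => v)).getD 0)
    ((PySem.List.min? (res.2.map (·.2)) (fun v => v)).getD 0 + 1)
    ((PySem.List.max? (res.2.map (·.2)) (fun v => v)).getD 0))

def scanCell (grid : List (List Int)) (h w : Int)
    (st : List (List Bool) × List (List Int)) (r c : Int) :
    List (List Bool) × List (List Int) :=
  if gg grid r c ≠ 0 ∧ vget st.1 r c = false then
    scanFinish st.2 (floodLoop grid h w (gg grid r c) [(r, c)] st.1 [])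
  else st

def solve_50cb2852 (grid : List (List Int)) : List (List Int) :=
  let h : Int := grid.length
  let w : Int := (grid.getD 0 []).length
  let out := grid.map (fun row => row)
  let visited := List.replicate grid.length (List.replicate (grid.getD 0 []).length false)
  ((PySem.List.pyRange 0 h 1).foldl (fun st r =>
    (PySem.List.pyRange 0 w 1).foldl (fun st c =>
      scanCell grid h w st r c) st) (visited, out)).2

-- ===== PORT B =====
-- quick-find relabel: 'for k in comp_id: if comp_id[k] == a: comp_id[k] = b'
def relabel (d : PySem.Dict (Int × Int) (Int × Int)) (a b : Int × Int) :
    PySem.Dict (Int × Int) (Int × Int) :=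
  PySem.Dict.mk (d.items.map (fun p => (p.1, if p.2 = a then b else p.2)))

def unionStep (grid : List (List Int)) (d : PySem.Dict (Int × Int) (Int × Int))
    (rc nb : Int × Int) : PySem.Dict (Int × Int) (Int × Int) :=
  if d.contains nb = true ∧ gg grid nb.1 nb.2 = gg grid rc.1 rc.2 then
    if d.getD rc rc ≠ d.getD nb nb then relabel d (d.getD rc rc) (d.getD nb nb) else d
  else d

def solve_50cb2852_alt (grid : List (List Int)) : List (List Int) :=
  let h : Int := grid.length
  let w : Int := (grid.getD 0 []).length
  let cid0 : PySem.Dict (Int × Int) (Int × Int) :=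
    (PySem.List.pyRange 0 h 1).foldl (fun d r => (PySem.List.pyRange 0 w 1).foldl (fun d c =>
      if gg grid r c ≠ 0 then d.insert (r, c) (r, c) else d) d)
      PySem.Dict.empty
  let cid := cid0.keys.foldl (fun d rc =>
      [(rc.1 + 1, rc.2), (rc.1, rc.2 + 1)].foldl (fun d nb => unionStep grid d rc nb) d) cid0
  let groups : PySem.Dict (Int × Int) (List (Int × Int)) :=
    cid.items.foldl (fun g p => g.modify p.2 [] (· ++ [p.1])) PySem.Dict.empty
  let boxes : List (Int × Int × Int × Int) :=
    groups.values.foldl (fun bs cells =>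
      if 4 ≤ cells.length then
        bs ++ [((PySem.List.min? (cells.map (·.1)) (fun x => x)).getD 0,
                (PySem.List.max? (cells.map (·.1)) (fun x => x)).getD 0,
                (PySem.List.min? (cells.map (·.2)) (fun x => x)).getD 0,
                (PySem.List.max? (cells.map (·.2)) (fun x => x)).getD 0)]
      else bs) []
  (PySem.List.enumerate grid 0).map (fun rrow =>
    (PySem.List.enumerate rrow.2 0).map (fun iv =>
      if boxes.any (fun b =>
          decide (b.1 < rrow.1 ∧ rrow.1 < b.2.1 ∧ b.2.2.1 < iv.1 ∧ iv.1 < b.2.2.2)) then 8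
      else iv.2))

-- ===== PRECONDITION & SPEC =====
-- Pre_ excludes exactly the inputs on which the Python A raises IndexError: the empty grid
-- (grid[0]) and grids with a row shorter than the first row (grid[r][c] in the row-major scan).
def Pre_solve_50cb2852 (grid : List (List Int)) : Prop :=
  grid ≠ [] ∧ ∀ row ∈ grid, (grid.getD 0 []).length ≤ row.length
instance (grid : List (List Int)) : Decidable (Pre_solve_50cb2852 grid) := by
  unfold Pre_solve_50cb2852; infer_instance

def pvWitness_solve_50cb2852 : List (List Int) := [[1, 1, 0], [1, 1, 0]]

def Spec_solve_50cb2852 (grid : List (List Int)) (out : List (List Int)) : Prop :=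
  out = solve_50cb2852_alt grid
instance (grid : List (List Int)) (out : List (List Int)) :
    Decidable (Spec_solve_50cb2852 grid out) := by unfold Spec_solve_50cb2852; infer_instance

-- ===== CLAIM (what is proved, stated in full; the proofs are below) =====
def Claim_equal_solve_50cb2852 : Prop := ∀ (grid : List (List Int)),
  Dom_solve_50cb2852 grid → Pre_solve_50cb2852 grid →
  Spec_solve_50cb2852 grid (solve_50cb2852 grid)

-- ===== LEMMAS AND PROOFS =====


-- ---------- graph-theoretic view of the grid ----------
def inB (grid : List (List Int)) (p : Int × Int) : Prop :=
  0 ≤ p.1 ∧ p.1 < (grid.length : Int) ∧ 0 ≤ p.2 ∧ p.2 < ((grid.getD 0 []).length : Int)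

def cv (grid : List (List Int)) (p : Int × Int) : Int := gg grid p.1 p.2

def stepR (grid : List (List Int)) (p q : Int × Int) : Prop :=
  inB grid p ∧ inB grid q ∧ cv grid p ≠ 0 ∧ cv grid q = cv grid p ∧
    ((q.1 = p.1 ∧ (q.2 = p.2 + 1 ∨ q.2 = p.2 - 1)) ∨
     (q.2 = p.2 ∧ (q.1 = p.1 + 1 ∨ q.1 = p.1 - 1)))

def reach (grid : List (List Int)) : (Int × Int) → (Int × Int) → Prop :=
  Relation.ReflTransGen (stepR grid)

theorem stepR_symm (grid : List (List Int)) : Symmetric (stepR grid) := by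
  rintro p q ⟨h1, h2, h3, h4, h5⟩
  refine ⟨h2, h1, by rw [h4]; exact h3, h4.symm, ?_⟩
  rcases h5 with ⟨ha, hb | hb⟩ | ⟨ha, hb | hb⟩
  · exact Or.inl ⟨ha.symm, Or.inr (by omega)⟩
  · exact Or.inl ⟨ha.symm, Or.inl (by omega)⟩
  · exact Or.inr ⟨ha.symm, Or.inr (by omega)⟩
  · exact Or.inr ⟨ha.symm, Or.inl (by omega)⟩

theorem reach_symm {grid : List (List Int)} {p q : Int × Int}
    (h : reach grid p q) : reach grid q p :=
  Relation.ReflTransGen.symmetric (stepR_symm grid) h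

theorem reach_trans {grid : List (List Int)} {p q s : Int × Int}
    (h1 : reach grid p q) (h2 : reach grid q s) : reach grid p s :=
  Relation.ReflTransGen.trans h1 h2

theorem reach_cv {grid : List (List Int)} {p q : Int × Int}
    (h : reach grid p q) : cv grid q = cv grid p := by
  induction h with
  | refl => rfl
  | tail _ hstep ih => exact hstep.2.2.2.1.trans ih

theorem reach_inB {grid : List (List Int)} {p q : Int × Int}
    (hp : inB grid p) (h : reach grid p q) : inB grid q := by
  induction h with
  | refl => exact hp
  | tail _ hstep _ => exact hstep.2.1

theorem reach_nz {grid : List (List Int)} {p q : Int × Int}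
    (hp : cv grid p ≠ 0) (h : reach grid p q) : cv grid q ≠ 0 := by
  rw [reach_cv h]; exact hp

theorem reach_shift {grid : List (List Int)} {s p : Int × Int}
    (h : reach grid s p) : ∀ x, (reach grid p x ↔ reach grid s x) := by
  intro x
  exact ⟨fun hx => reach_trans h hx, fun hx => reach_trans (reach_symm h) hx⟩

def Big (grid : List (List Int)) (p : Int × Int) : Prop :=
  ∃ l : List (Int × Int), l.Nodup ∧ (∀ x, x ∈ l ↔ reach grid p x) ∧ 4 ≤ l.length

theorem big_iff_len {grid : List (List Int)} {p : Int × Int} {L : List (Int × Int)}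
    (hnd : L.Nodup) (hmem : ∀ x, x ∈ L ↔ reach grid p x) :
    Big grid p ↔ 4 ≤ L.length := by
  constructor
  · rintro ⟨l, hl1, hl2, hl3⟩
    have hperm : l.Perm L :=
      (List.perm_ext_iff_of_nodup hl1 hnd).mpr (fun a => (hl2 a).trans (hmem a).symm)
    rw [← hperm.length_eq]
    exact hl3
  · intro h
    exact ⟨L, hnd, hmem, h⟩

def CovS (grid : List (List Int)) (Sc : (Int × Int) → Prop) (r i : Int) : Prop :=
  ∃ p, Sc p ∧ inB grid p ∧ cv grid p ≠ 0 ∧ Big grid p ∧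
    (∃ q, reach grid p q ∧ q.1 < r) ∧ (∃ q, reach grid p q ∧ r < q.1) ∧
    (∃ q, reach grid p q ∧ q.2 < i) ∧ (∃ q, reach grid p q ∧ i < q.2)

def Covered (grid : List (List Int)) (r i : Int) : Prop :=
  CovS grid (fun _ => True) r i

theorem CovS_congr {grid : List (List Int)} {S1 S2 : (Int × Int) → Prop}
    (h : ∀ p, inB grid p → cv grid p ≠ 0 → (S1 p ↔ S2 p)) :
    ∀ r i, CovS grid S1 r i ↔ CovS grid S2 r i := by
  intro r i
  constructor
  · rintro ⟨p, hs, h1, h2, h3⟩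
    exact ⟨p, (h p h1 h2).mp hs, h1, h2, h3⟩
  · rintro ⟨p, hs, h1, h2, h3⟩
    exact ⟨p, (h p h1 h2).mpr hs, h1, h2, h3⟩

-- ---------- the cell enumeration ----------
def allCells (grid : List (List Int)) : List (Int × Int) :=
  (PySem.List.pyRange 0 grid.length 1).flatMap (fun r =>
    (PySem.List.pyRange 0 (grid.getD 0 []).length 1).map (fun c => (r, c)))

theorem mem_allCells {grid : List (List Int)} {p : Int × Int} :
    p ∈ allCells grid ↔ inB grid p := by
  obtain ⟨a, b⟩ := p
  simp only [allCells, List.mem_flatMap, List.mem_map, PySem.List.mem_pyRange_one, inB]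
  constructor
  · rintro ⟨r, hr, c, hc, he⟩
    rw [Prod.mk.injEq] at he
    obtain ⟨h1, h2⟩ := he
    refine ⟨by omega, by omega, by omega, by omega⟩
  · rintro ⟨h1, h2, h3, h4⟩
    exact ⟨a, ⟨h1, h2⟩, b, ⟨h3, h4⟩, rfl⟩

theorem nodup_allCells (grid : List (List Int)) : (allCells grid).Nodup := by
  rw [allCells, List.nodup_flatMap]
  constructor
  · intro r _
    exact (PySem.List.nodup_pyRange_one _ _).map (fun x y hxy => congrArg Prod.snd hxy)
  · apply List.Pairwise.imp ?_
      (PySem.List.pairwise_lt_pyRange_one (a := 0) (b := (grid.length : Int)))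
    intro r r' hlt
    simp only [List.disjoint_left, List.mem_map]
    rintro x ⟨c, -, rfl⟩ ⟨c', -, he⟩
    rw [Prod.mk.injEq] at he
    omega

-- ---------- shapes and pointwise output spec ----------
def vshape (grid : List (List Int)) (v : List (List Bool)) : Prop :=
  v.length = grid.length ∧
  ∀ k : Nat, k < v.length → (v.getD k []).length = (grid.getD 0 []).length

def oshape (grid out : List (List Int)) : Prop :=
  out.length = grid.length ∧ ∀ k : Nat, (out.getD k []).length = (grid.getD k []).length

def OutSpec (grid out : List (List Int)) (Cov : Int → Int → Prop) : Prop :=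
  oshape grid out ∧ ∀ r i : Nat, i < (grid.getD r []).length →
    (Cov r i → (out.getD r []).getD i 0 = 8) ∧
    (¬ Cov r i → (out.getD r []).getD i 0 = (grid.getD r []).getD i 0)

theorem OutSpec_congr {grid out : List (List Int)} {C1 C2 : Int → Int → Prop}
    (h : OutSpec grid out C1) (hiff : ∀ r i : Nat, i < (grid.getD r []).length → (C1 r i ↔ C2 r i)) :
    OutSpec grid out C2 := by
  refine ⟨h.1, fun r i hi => ?_⟩
  obtain ⟨h8, hg⟩ := h.2 r i hi
  exact ⟨fun hc => h8 ((hiff r i hi).mpr hc), fun hc => hg (fun c1 => hc ((hiff r i hi).mp c1))⟩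

theorem getDk {α : Type} (l : List α) (d : α) (k : Nat) (hk : k < l.length) :
    l.getD k d = l[k] := by
  rw [List.getD_eq_getElem?_getD, List.getElem?_eq_getElem hk, Option.getD_some]

theorem outspec_unique {grid o1 o2 : List (List Int)} {Cov : Int → Int → Prop}
    (h1 : OutSpec grid o1 Cov) (h2 : OutSpec grid o2 Cov) : o1 = o2 := by
  obtain ⟨⟨hl1, hr1⟩, hp1⟩ := h1
  obtain ⟨⟨hl2, hr2⟩, hp2⟩ := h2
  apply List.ext_getElem (by omega)
  intro k hk1 hk2
  have e1 := hr1 k; have e2 := hr2 k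
  rw [getDk o1 [] k hk1] at e1
  rw [getDk o2 [] k hk2] at e2
  apply List.ext_getElem (by omega)
  intro i hi1 hi2
  have hlen : i < (grid.getD k []).length := by omega
  have v1 := hp1 k i hlen
  have v2 := hp2 k i hlen
  rw [getDk o1 [] k hk1, getDk o1[k] 0 i hi1] at v1
  rw [getDk o2 [] k hk2, getDk o2[k] 0 i hi2] at v2
  by_cases hc : Cov k i
  · rw [v1.1 hc, v2.1 hc]
  · rw [v1.2 hc, v2.2 hc]



-- ---------- getD/set pointwise lemmas ----------
theorem getD_set {α : Type} (l : List α) (n k : Nat) (a d : α) :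
    (l.set n a).getD k d = if k = n ∧ n < l.length then a else l.getD k d := by
  rw [List.getD_eq_getElem?_getD, List.getD_eq_getElem?_getD, List.getElem?_set]
  by_cases h1 : n = k
  · subst h1
    by_cases h2 : n < l.length
    · simp [h2]
    · simp [h2]
  · rw [if_neg h1, if_neg (by rintro ⟨rfl, -⟩; exact h1 rfl)]

theorem oshape_oset {grid o : List (List Int)} (h : oshape grid o) (r c x : Int) :
    oshape grid (oset o r c x) := by
  refine ⟨by simpa [oset] using h.1, fun k => ?_⟩
  unfold oset
  rw [getD_set]
  by_cases hk : k = r.toNat ∧ r.toNat < o.length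
  · rw [if_pos hk, List.length_set, hk.1]
    exact h.2 r.toNat
  · rw [if_neg hk]
    exact h.2 k

theorem getD_oset (o : List (List Int)) (r c x : Int) (hr : 0 ≤ r) (hc : 0 ≤ c)
    (hrl : r.toNat < o.length) (hcl : c.toNat < (o.getD r.toNat []).length) (k i : Nat) :
    ((oset o r c x).getD k []).getD i 0 =
      if (k : Int) = r ∧ (i : Int) = c then x else (o.getD k []).getD i 0 := by
  unfold oset
  rw [getD_set]
  by_cases hk : k = r.toNat ∧ r.toNat < o.length
  · rw [if_pos hk]
    obtain ⟨rfl, -⟩ := hk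
    rw [getD_set]
    by_cases hi : i = c.toNat ∧ c.toNat < (o.getD r.toNat []).length
    · rw [if_pos hi, if_pos (by omega)]
    · rw [if_neg hi, if_neg (by omega)]
  · rw [if_neg hk, if_neg (by omega)]

-- ---------- fill lemmas ----------
theorem fill_cols_spec {grid : List (List Int)} (hW : ∀ k : Nat, k < grid.length →
      (grid.getD 0 []).length ≤ (grid.getD k []).length)
    (ir : Int) (hir0 : 0 ≤ ir) (hirH : ir < (grid.length : Int)) :
    ∀ (cols : List Int) (o : List (List Int)), oshape grid o →
    (∀ c ∈ cols, 0 ≤ c ∧ c < ((grid.getD 0 []).length : Int)) →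
    oshape grid (cols.foldl (fun o ic => oset o ir ic 8) o) ∧
    ∀ k i : Nat,
      ((cols.foldl (fun o ic => oset o ir ic 8) o).getD k []).getD i 0 =
        if (k : Int) = ir ∧ (i : Int) ∈ cols then 8 else (o.getD k []).getD i 0 := by
  intro cols
  induction cols with
  | nil => intro o hosh _; exact ⟨hosh, by simp⟩
  | cons c cs ih =>
    intro o hosh hmem
    have hc := hmem c (List.mem_cons_self ..)
    have hrl : ir.toNat < o.length := by rw [hosh.1]; omega
    have hcl : c.toNat < (o.getD ir.toNat []).length := by
      have h1 := hosh.2 ir.toNat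
      have h2 := hW ir.toNat (by omega)
      omega
    obtain ⟨ihs, ihv⟩ := ih (oset o ir c 8) (oshape_oset hosh ir c 8)
      (fun c' hc' => hmem c' (List.mem_cons_of_mem _ hc'))
    rw [List.foldl_cons]
    refine ⟨ihs, fun k i => ?_⟩
    rw [ihv k i, getD_oset o ir c 8 hir0 hc.1 hrl hcl k i]
    by_cases h1 : (k : Int) = ir ∧ (i : Int) ∈ cs
    · rw [if_pos h1, if_pos ⟨h1.1, List.mem_cons_of_mem _ h1.2⟩]
    · rw [if_neg h1]
      by_cases h2 : (k : Int) = ir ∧ (i : Int) = c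
      · rw [if_pos h2, if_pos ⟨h2.1, h2.2 ▸ List.mem_cons_self ..⟩]
      · rw [if_neg h2, if_neg (by
          rintro ⟨hk, hi⟩
          rcases List.mem_cons.mp hi with h | h
          · exact h2 ⟨hk, h⟩
          · exact h1 ⟨hk, h⟩)]

theorem fill_rows_spec {grid : List (List Int)} (hW : ∀ k : Nat, k < grid.length →
      (grid.getD 0 []).length ≤ (grid.getD k []).length)
    (c1 c2 : Int) (h0c : 0 ≤ c1) (hc2 : c2 ≤ ((grid.getD 0 []).length : Int)) :
    ∀ (R : List Int) (o : List (List Int)), oshape grid o →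
    (∀ r' ∈ R, 0 ≤ r' ∧ r' < (grid.length : Int)) →
    oshape grid (R.foldl (fun o ir => (PySem.List.pyRange c1 c2 1).foldl (fun o ic => oset o ir ic 8) o) o) ∧
    ∀ k i : Nat,
      ((R.foldl (fun o ir => (PySem.List.pyRange c1 c2 1).foldl (fun o ic => oset o ir ic 8) o) o).getD k []).getD i 0 =
        if (k : Int) ∈ R ∧ c1 ≤ (i : Int) ∧ (i : Int) < c2 then 8 else (o.getD k []).getD i 0 := by
  intro R
  induction R with
  | nil => intro o hosh _; exact ⟨hosh, by simp⟩
  | cons r' rs ih =>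
    intro o hosh hmem
    have hr' := hmem r' (List.mem_cons_self ..)
    obtain ⟨s1, v1⟩ := fill_cols_spec hW r' hr'.1 hr'.2 (PySem.List.pyRange c1 c2 1) o hosh
      (fun c hc => by
        rw [PySem.List.mem_pyRange_one] at hc
        exact ⟨by omega, by omega⟩)
    obtain ⟨s2, v2⟩ := ih _ s1 (fun x hx => hmem x (List.mem_cons_of_mem _ hx))
    rw [List.foldl_cons]
    refine ⟨s2, fun k i => ?_⟩
    rw [v2 k i, v1 k i]
    by_cases h1 : (k : Int) ∈ rs ∧ c1 ≤ (i : Int) ∧ (i : Int) < c2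
    · rw [if_pos h1, if_pos ⟨List.mem_cons_of_mem _ h1.1, h1.2⟩]
    · rw [if_neg h1]
      by_cases h2 : (k : Int) = r' ∧ (i : Int) ∈ PySem.List.pyRange c1 c2 1
      · rw [if_pos h2, if_pos ⟨h2.1 ▸ List.mem_cons_self .., by
          have := PySem.List.mem_pyRange_one.mp h2.2; omega⟩]
      · rw [if_neg h2, if_neg (by
          rintro ⟨hm, hb⟩
          rcases List.mem_cons.mp hm with h | h
          · exact h2 ⟨h, PySem.List.mem_pyRange_one.mpr hb⟩
          · exact h1 ⟨h, hb⟩)]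

theorem fill2_spec {grid out : List (List Int)} (hosh : oshape grid out)
    (hW : ∀ k : Nat, k < grid.length → (grid.getD 0 []).length ≤ (grid.getD k []).length)
    (r1 r2 c1 c2 : Int) (h0r : 0 ≤ r1) (h0c : 0 ≤ c1)
    (hr2 : r2 ≤ (grid.length : Int)) (hc2 : c2 ≤ ((grid.getD 0 []).length : Int)) :
    oshape grid (fill2 out r1 r2 c1 c2) ∧
    ∀ k i : Nat, ((fill2 out r1 r2 c1 c2).getD k []).getD i 0 =
      if r1 ≤ (k : Int) ∧ (k : Int) < r2 ∧ c1 ≤ (i : Int) ∧ (i : Int) < c2 then 8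
      else (out.getD k []).getD i 0 := by
  obtain ⟨s1, v1⟩ := fill_rows_spec hW c1 c2 h0c hc2 (PySem.List.pyRange r1 r2 1) out hosh
    (fun r' hr' => by
      rw [PySem.List.mem_pyRange_one] at hr'
      exact ⟨by omega, by omega⟩)
  refine ⟨s1, fun k i => ?_⟩
  rw [fill2, v1 k i]
  by_cases h1 : (k : Int) ∈ PySem.List.pyRange r1 r2 1 ∧ c1 ≤ (i : Int) ∧ (i : Int) < c2
  · rw [if_pos h1, if_pos (by
      have := PySem.List.mem_pyRange_one.mp h1.1
      exact ⟨by omega, by omega, h1.2⟩)]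
  · rw [if_neg h1, if_neg (by
      rintro ⟨ha, hb, hc⟩
      exact h1 ⟨PySem.List.mem_pyRange_one.mpr ⟨ha, hb⟩, hc⟩)]

-- ---------- min/max of a nonempty Int list ----------
theorem min_getD_lt {L : List Int} (hne : L ≠ []) (r : Int) :
    (PySem.List.min? L (fun x => x)).getD 0 < r ↔ ∃ y ∈ L, y < r := by
  obtain ⟨x, t, rfl⟩ := List.exists_cons_of_ne_nil hne
  rw [PySem.List.min?_id_cons, Option.getD_some]
  have h1 := PySem.List.foldl_min_le t x
  constructor
  · intro h
    rcases PySem.List.foldl_min_mem t x with h2 | h2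
    · exact ⟨x, List.mem_cons_self .., by omega⟩
    · exact ⟨t.foldl min x, List.mem_cons_of_mem _ h2, h⟩
  · rintro ⟨y, hy, hyr⟩
    rcases List.mem_cons.mp hy with rfl | hy
    · exact lt_of_le_of_lt h1.1 hyr
    · exact lt_of_le_of_lt (h1.2 y hy) hyr

theorem lt_max_getD {L : List Int} (hne : L ≠ []) (r : Int) :
    r < (PySem.List.max? L (fun x => x)).getD 0 ↔ ∃ y ∈ L, r < y := by
  obtain ⟨x, t, rfl⟩ := List.exists_cons_of_ne_nil hne
  rw [PySem.List.max?_id_cons, Option.getD_some]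
  have h1 := PySem.List.le_foldl_max t x
  constructor
  · intro h
    rcases PySem.List.foldl_max_mem t x with h2 | h2
    · exact ⟨x, List.mem_cons_self .., by omega⟩
    · exact ⟨t.foldl max x, List.mem_cons_of_mem _ h2, h⟩
  · rintro ⟨y, hy, hyr⟩
    rcases List.mem_cons.mp hy with rfl | hy
    · exact lt_of_lt_of_le hyr h1.1
    · exact lt_of_lt_of_le hyr (h1.2 y hy)

theorem min_getD_mem {L : List Int} (hne : L ≠ []) :
    (PySem.List.min? L (fun x => x)).getD 0 ∈ L := by
  obtain ⟨x, t, rfl⟩ := List.exists_cons_of_ne_nil hne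
  rw [PySem.List.min?_id_cons, Option.getD_some]
  rcases PySem.List.foldl_min_mem t x with h2 | h2
  · rw [h2]; exact List.mem_cons_self ..
  · exact List.mem_cons_of_mem _ h2

theorem max_getD_mem {L : List Int} (hne : L ≠ []) :
    (PySem.List.max? L (fun x => x)).getD 0 ∈ L := by
  obtain ⟨x, t, rfl⟩ := List.exists_cons_of_ne_nil hne
  rw [PySem.List.max?_id_cons, Option.getD_some]
  rcases PySem.List.foldl_max_mem t x with h2 | h2
  · rw [h2]; exact List.mem_cons_self ..
  · exact List.mem_cons_of_mem _ h2

-- ---------- visited-matrix lemmas ----------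
theorem vshape_vset {grid : List (List Int)} {v : List (List Bool)} (hsh : vshape grid v) (r c : Int) :
    vshape grid (vset v r c) := by
  refine ⟨by simpa [vset] using hsh.1, fun k hk => ?_⟩
  unfold vset at *
  rw [List.length_set] at hk
  rw [getD_set]
  by_cases h : k = r.toNat ∧ r.toNat < v.length
  · rw [if_pos h, List.length_set]
    exact hsh.2 r.toNat h.2
  · rw [if_neg h]
    exact hsh.2 k hk

theorem vshape_replicate (grid : List (List Int)) :
    vshape grid (List.replicate grid.length (List.replicate (grid.getD 0 []).length false)) := by
  refine ⟨by simp, fun k hk => ?_⟩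
  rw [List.length_replicate] at hk
  rw [getDk _ _ k (by simpa), List.getElem_replicate, List.length_replicate]

theorem vget_replicate {grid : List (List Int)} {q : Int × Int} (hq : inB grid q) :
    vget (List.replicate grid.length (List.replicate (grid.getD 0 []).length false)) q.1 q.2 = false := by
  obtain ⟨h1, h2, h3, h4⟩ := hq
  unfold vget
  have e1 : (List.replicate grid.length (List.replicate (grid.getD 0 []).length false)).getD q.1.toNat [] =
      List.replicate (grid.getD 0 []).length false := by
    rw [getDk _ _ _ (by rw [List.length_replicate]; omega)]
    exact List.getElem_replicate ..
  rw [e1, getDk _ _ _ (by rw [List.length_replicate]; omega)]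
  exact List.getElem_replicate ..

theorem vget_vset {grid : List (List Int)} {v : List (List Bool)} (hsh : vshape grid v)
    {y q : Int × Int} (hy : inB grid y) (hq : inB grid q) :
    vget (vset v y.1 y.2) q.1 q.2 = true ↔ (q = y ∨ vget v q.1 q.2 = true) := by
  obtain ⟨hy1, hy2, hy3, hy4⟩ := hy
  obtain ⟨hq1, hq2, hq3, hq4⟩ := hq
  have hyl : y.1.toNat < v.length := by rw [hsh.1]; omega
  have hyc : y.2.toNat < (v.getD y.1.toNat []).length := by rw [hsh.2 y.1.toNat hyl]; omega
  have hqy : q = y ↔ (q.1.toNat = y.1.toNat ∧ q.2.toNat = y.2.toNat) := by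
    obtain ⟨a, b⟩ := q; obtain ⟨a', b'⟩ := y
    rw [Prod.mk.injEq]
    simp only at *
    constructor
    · rintro ⟨rfl, rfl⟩; exact ⟨rfl, rfl⟩
    · rintro ⟨e1, e2⟩; constructor <;> omega
  unfold vget vset
  rw [getD_set]
  by_cases hk : q.1.toNat = y.1.toNat ∧ y.1.toNat < v.length
  · rw [if_pos hk, getD_set]
    by_cases hi : q.2.toNat = y.2.toNat ∧ y.2.toNat < (v.getD y.1.toNat []).length
    · rw [if_pos hi]
      simp only [hqy]
      constructor
      · intro _; exact Or.inl ⟨hk.1, hi.1⟩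
      · intro _; trivial
    · rw [if_neg hi]
      have hne : ¬(q.1.toNat = y.1.toNat ∧ q.2.toNat = y.2.toNat) := fun h => hi ⟨h.2, hyc⟩
      rw [hk.1]
      simp only [hqy]
      tauto
  · rw [if_neg hk]
    have hne : ¬(q.1.toNat = y.1.toNat ∧ q.2.toNat = y.2.toNat) := fun h => hk ⟨h.1, hyl⟩
    simp only [hqy]
    tauto

-- ---------- flood fill correctness ----------
def VInv (grid : List (List Int)) (Sc : (Int × Int) → Prop) (v : List (List Bool)) : Prop :=
  vshape grid v ∧ ∀ q, inB grid q →
    (vget v q.1 q.2 = true ↔ ∃ s, Sc s ∧ inB grid s ∧ cv grid s ≠ 0 ∧ reach grid s q)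

set_option maxHeartbeats 1600000 in
theorem floodLoop_spec (grid : List (List Int)) (color : Int) (p : Int × Int)
    (S0 : (Int × Int) → Prop)
    (hpin : inB grid p) (hpc : cv grid p = color) (hc0 : color ≠ 0)
    (hS0 : ∀ q, S0 q → ¬ reach grid p q) :
    ∀ (stack : List (Int × Int)) (visited : List (List Bool)) (cells : List (Int × Int)),
      vshape grid visited →
      (∀ q, inB grid q → (vget visited q.1 q.2 = true ↔ (S0 q ∨ q ∈ cells))) →
      cells.Nodup →
      (∀ x ∈ cells, reach grid p x) →
      (∀ y ∈ stack, inB grid y → cv grid y = color → reach grid p y) →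
      (∀ x ∈ cells, ∀ y, stepR grid x y → y ∈ cells ∨ y ∈ stack) →
      (p ∈ cells ∨ p ∈ stack) →
      vshape grid (floodLoop grid grid.length (grid.getD 0 []).length color stack visited cells).1 ∧
      (floodLoop grid grid.length (grid.getD 0 []).length color stack visited cells).2.Nodup ∧
      (∀ x, x ∈ (floodLoop grid grid.length (grid.getD 0 []).length color stack visited cells).2 ↔ reach grid p x) ∧
      (∀ q, inB grid q →
        (vget (floodLoop grid grid.length (grid.getD 0 []).length color stack visited cells).1 q.1 q.2 = true ↔
          (S0 q ∨ reach grid p q))) := by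
  intro stack visited cells
  induction stack, visited, cells using floodLoop.induct grid grid.length ((grid.getD 0 []).length) color with
  | case1 visited cells =>
    intro hsh hvis hnd hrch hstk hcl hp
    rw [floodLoop.eq_1]
    have hmem : ∀ x, x ∈ cells ↔ reach grid p x := by
      intro x
      refine ⟨hrch x, fun hx => ?_⟩
      induction hx with
      | refl =>
        rcases hp with h | h
        · exact h
        · simp at h
      | tail hab hbc ih =>
        rcases hcl _ ih _ hbc with h | h
        · exact h
        · simp at h
    refine ⟨hsh, hnd, hmem, fun q hq => ?_⟩
    rw [hvis q hq, hmem q]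
  | case2 r c rest visited cells hcond ih =>
    intro hsh hvis hnd hrch hstk hcl hp
    have hnotin : ¬ inB grid (r, c) := by
      unfold inB; simp only; omega
    rw [floodLoop.eq_2, if_pos hcond]
    apply ih hsh hvis hnd hrch
    · intro y hy h1 h2
      exact hstk y (List.mem_cons_of_mem _ hy) h1 h2
    · intro x hx y hy
      rcases hcl x hx y hy with h | h
      · exact Or.inl h
      · rcases List.mem_cons.mp h with h | h
        · exact absurd hy.2.1 (h ▸ hnotin)
        · exact Or.inr h
    · rcases hp with h | h
      · exact Or.inl h
      · rcases List.mem_cons.mp h with h | h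
        · exact absurd hpin (h ▸ hnotin)
        · exact Or.inr h
  | case3 r c rest visited cells hcond hcond2 ih =>
    intro hsh hvis hnd hrch hstk hcl hp
    have hin : inB grid (r, c) := by
      unfold inB; simp only; omega
    rw [floodLoop.eq_2, if_neg hcond, if_pos hcond2]
    have hkey : reach grid p (r, c) → (r, c) ∈ cells := by
      intro hr
      rcases hcond2 with hv | hv
      · rcases (hvis _ hin).mp hv with h | h
        · exact absurd hr (hS0 _ h)
        · exact h
      · exact absurd ((reach_cv hr).trans hpc) hv
    apply ih hsh hvis hnd hrch
    · intro y hy h1 h2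
      exact hstk y (List.mem_cons_of_mem _ hy) h1 h2
    · intro x hx y hy
      rcases hcl x hx y hy with h | h
      · exact Or.inl h
      · rcases List.mem_cons.mp h with rfl | h
        · exact Or.inl (hkey (Relation.ReflTransGen.tail (hrch x hx) hy))
        · exact Or.inr h
    · rcases hp with h | h
      · exact Or.inl h
      · rcases List.mem_cons.mp h with rfl | h
        · exact Or.inl (hkey Relation.ReflTransGen.refl)
        · exact Or.inr h
  | case4 r c rest visited cells hcond hcond2 ih =>
    intro hsh hvis hnd hrch hstk hcl hp
    have hin : inB grid (r, c) := by
      unfold inB; simp only; omega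
    have hvf : vget visited r c = false := by
      rcases Bool.eq_false_or_eq_true (vget visited r c) with h | h
      · exact absurd (Or.inl h) hcond2
      · exact h
    have hcol : cv grid (r, c) = color := by
      by_contra h
      exact hcond2 (Or.inr h)
    have hrc : reach grid p (r, c) := hstk _ (List.mem_cons_self ..) hin hcol
    have hnm : (r, c) ∉ cells := by
      intro h
      rw [(hvis _ hin).mpr (Or.inr h)] at hvf
      simp at hvf
    rw [floodLoop.eq_2, if_neg hcond, if_neg hcond2]
    apply ih (vshape_vset hsh r c)
    · intro q hq
      have hv : vget (vset visited r c) q.1 q.2 = true ↔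
          (q = (r, c) ∨ vget visited q.1 q.2 = true) := vget_vset hsh hin hq
      rw [hv, hvis q hq]
      simp only [List.mem_append, List.mem_singleton]
      tauto
    · rw [List.nodup_append]
      refine ⟨hnd, List.nodup_singleton _, ?_⟩
      intro a ha b hb he
      rw [List.mem_singleton.mp hb] at he
      rw [he] at ha
      exact hnm ha
    · intro x hx
      rcases List.mem_append.mp hx with h | h
      · exact hrch x h
      · rw [List.mem_singleton.mp h]
        exact hrc
    · intro y hy hyin hyc
      have hstep : stepR grid (r, c) y → reach grid p y := fun hs =>
        Relation.ReflTransGen.tail hrc hs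
      have hcv0 : cv grid (r, c) ≠ 0 := by rw [hcol]; exact hc0
      simp only [List.mem_cons] at hy
      rcases hy with rfl | rfl | rfl | rfl | h
      · exact hstep ⟨hin, hyin, hcv0, by rw [hyc, hcol], Or.inl ⟨rfl, Or.inl rfl⟩⟩
      · exact hstep ⟨hin, hyin, hcv0, by rw [hyc, hcol], Or.inl ⟨rfl, Or.inr rfl⟩⟩
      · exact hstep ⟨hin, hyin, hcv0, by rw [hyc, hcol], Or.inr ⟨rfl, Or.inl rfl⟩⟩
      · exact hstep ⟨hin, hyin, hcv0, by rw [hyc, hcol], Or.inr ⟨rfl, Or.inr rfl⟩⟩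
      · exact hstk y (List.mem_cons_of_mem _ h) hyin hyc
    · intro x hx y hy
      rcases List.mem_append.mp hx with h | h
      · rcases hcl x h y hy with h2 | h2
        · exact Or.inl (List.mem_append_left _ h2)
        · rcases List.mem_cons.mp h2 with h3 | h3
          · exact Or.inl (List.mem_append_right _ (by simp [h3]))
          · exact Or.inr (by simp [h3])
      · rw [List.mem_singleton.mp h] at hy
        obtain ⟨-, -, -, -, hadj⟩ := hy
        right
        obtain ⟨a, b⟩ := y
        simp only at hadj
        rcases hadj with ⟨ha, hb | hb⟩ | ⟨ha, hb | hb⟩ <;>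
          simp [Prod.ext_iff, ha, hb]
    · rcases hp with h | h
      · exact Or.inl (List.mem_append_left _ h)
      · rcases List.mem_cons.mp h with h2 | h2
        · exact Or.inl (List.mem_append_right _ (by simp [h2]))
        · exact Or.inr (by simp [h2])

theorem VInv_congr {grid : List (List Int)} {S1 S2 : (Int × Int) → Prop} {v : List (List Bool)}
    (hiff : ∀ s, S1 s ↔ S2 s) (h : VInv grid S1 v) : VInv grid S2 v := by
  refine ⟨h.1, fun q hq => ?_⟩
  rw [h.2 q hq]
  constructor
  · rintro ⟨s, hs, h3⟩; exact ⟨s, (hiff s).mp hs, h3⟩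
  · rintro ⟨s, hs, h3⟩; exact ⟨s, (hiff s).mpr hs, h3⟩

theorem Big_congr {grid : List (List Int)} {s0 x : Int × Int}
    (h : reach grid s0 x) : Big grid x ↔ Big grid s0 := by
  constructor <;> rintro ⟨l, hl1, hl2, hl3⟩
  · exact ⟨l, hl1, fun y => (hl2 y).trans (reach_shift h y), hl3⟩
  · exact ⟨l, hl1, fun y => (hl2 y).trans (reach_shift h y).symm, hl3⟩

theorem covS_absorb {grid : List (List Int)} {Sc : (Int × Int) → Prop} {x s0 : Int × Int}
    (h0 : Sc s0) (h0in : inB grid s0) (h0nz : cv grid s0 ≠ 0) (hreach : reach grid s0 x) :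
    ∀ r i, CovS grid (fun s => Sc s ∨ s = x) r i ↔ CovS grid Sc r i := by
  intro r i
  constructor
  · rintro ⟨p, hp, hin, hnz, hbig, ⟨q1, hq1, hb1⟩, ⟨q2, hq2, hb2⟩, ⟨q3, hq3, hb3⟩, ⟨q4, hq4, hb4⟩⟩
    rcases hp with hp | rfl
    · exact ⟨p, hp, hin, hnz, hbig, ⟨q1, hq1, hb1⟩, ⟨q2, hq2, hb2⟩, ⟨q3, hq3, hb3⟩, ⟨q4, hq4, hb4⟩⟩
    · exact ⟨s0, h0, h0in, h0nz, (Big_congr hreach).mp hbig,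
        ⟨q1, (reach_shift hreach q1).mp hq1, hb1⟩, ⟨q2, (reach_shift hreach q2).mp hq2, hb2⟩,
        ⟨q3, (reach_shift hreach q3).mp hq3, hb3⟩, ⟨q4, (reach_shift hreach q4).mp hq4, hb4⟩⟩
  · rintro ⟨p, hp, rest⟩; exact ⟨p, Or.inl hp, rest⟩

theorem covS_absorb_zero {grid : List (List Int)} {Sc : (Int × Int) → Prop} {x : Int × Int}
    (hz : cv grid x = 0) :
    ∀ r i, CovS grid (fun s => Sc s ∨ s = x) r i ↔ CovS grid Sc r i := by
  intro r i
  constructor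
  · rintro ⟨p, hp, hin, hnz, rest⟩
    rcases hp with hp | rfl
    · exact ⟨p, hp, hin, hnz, rest⟩
    · exact absurd hz hnz
  · rintro ⟨p, hp, rest⟩; exact ⟨p, Or.inl hp, rest⟩

theorem covS_absorb_small {grid : List (List Int)} {Sc : (Int × Int) → Prop} {x : Int × Int}
    (hs : ¬ Big grid x) :
    ∀ r i, CovS grid (fun s => Sc s ∨ s = x) r i ↔ CovS grid Sc r i := by
  intro r i
  constructor
  · rintro ⟨p, hp, hin, hnz, hbig, rest⟩
    rcases hp with hp | rfl
    · exact ⟨p, hp, hin, hnz, hbig, rest⟩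
    · exact absurd hbig hs
  · rintro ⟨p, hp, rest⟩; exact ⟨p, Or.inl hp, rest⟩

theorem scan_go (grid : List (List Int))
    (hW : ∀ k : Nat, k < grid.length → (grid.getD 0 []).length ≤ (grid.getD k []).length) :
    ∀ (cs : List (Int × Int)) (Sc : (Int × Int) → Prop) (visited : List (List Bool)) (out : List (List Int)),
      (∀ x ∈ cs, inB grid x) →
      VInv grid Sc visited →
      OutSpec grid out (CovS grid Sc) →
      VInv grid (fun s => Sc s ∨ s ∈ cs)
        (cs.foldl (fun st x => scanCell grid grid.length (grid.getD 0 []).length st x.1 x.2) (visited, out)).1 ∧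
      OutSpec grid
        (cs.foldl (fun st x => scanCell grid grid.length (grid.getD 0 []).length st x.1 x.2) (visited, out)).2
        (CovS grid (fun s => Sc s ∨ s ∈ cs)) := by
  intro cs
  induction cs with
  | nil =>
    intro Sc visited out hcs hvinv hout
    simp only [List.foldl_nil]
    exact ⟨VInv_congr (fun s => by simp) hvinv,
      OutSpec_congr hout (fun r i _ => CovS_congr (fun p _ _ => by simp) r i)⟩
  | cons x cs ih =>
    intro Sc visited out hcs hvinv hout
    have hx : inB grid x := hcs x (List.mem_cons_self ..)
    simp only [List.foldl_cons]
    have hstep : VInv grid (fun s => Sc s ∨ s = x)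
        (scanCell grid grid.length (grid.getD 0 []).length (visited, out) x.1 x.2).1 ∧
        OutSpec grid (scanCell grid grid.length (grid.getD 0 []).length (visited, out) x.1 x.2).2
          (CovS grid (fun s => Sc s ∨ s = x)) := by
      by_cases hcase : gg grid x.1 x.2 ≠ 0 ∧ vget visited x.1 x.2 = false
      · -- the flood fill runs from x
        have hres := floodLoop_spec grid (gg grid x.1 x.2) x
          (fun q => ∃ s, Sc s ∧ inB grid s ∧ cv grid s ≠ 0 ∧ reach grid s q)
          hx rfl hcase.1
          (by
            rintro q ⟨s, hs, hsin, hsnz, hsr⟩ hxq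
            have hsx : reach grid s x := reach_trans hsr (reach_symm hxq)
            have hv := (hvinv.2 x hx).mpr ⟨s, hs, hsin, hsnz, hsx⟩
            rw [hcase.2] at hv
            exact Bool.false_ne_true hv)
          [(x.1, x.2)] visited []
          hvinv.1
          (fun q hq => by rw [hvinv.2 q hq]; simp)
          (by simp)
          (by simp)
          (by
            intro y hy _ _
            rw [List.mem_singleton.mp hy]
            exact Relation.ReflTransGen.refl)
          (by simp)
          (Or.inr (by simp))
        obtain ⟨hsh', hnd', hmem', hvget'⟩ := hres
        set F := floodLoop grid (grid.length : Int) ((grid.getD 0 []).length : Int)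
          (gg grid x.1 x.2) [(x.1, x.2)] visited [] with hF
        have hVnew : VInv grid (fun s => Sc s ∨ s = x) F.1 := by
          refine ⟨hsh', fun q hq => ?_⟩
          rw [hvget' q hq]
          constructor
          · rintro (⟨s, hs, h3⟩ | hr)
            · exact ⟨s, Or.inl hs, h3⟩
            · exact ⟨x, Or.inr rfl, hx, hcase.1, hr⟩
          · rintro ⟨s, hs | rfl, h3⟩
            · exact Or.inl ⟨s, hs, h3⟩
            · exact Or.inr h3.2.2
        have hred : scanCell grid grid.length (grid.getD 0 []).length (visited, out) x.1 x.2 =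
            scanFinish out F := by
          unfold scanCell
          rw [if_pos ⟨hcase.1, hcase.2⟩]
        rw [hred]
        unfold scanFinish
        split_ifs with hlen
        · exact ⟨hVnew, OutSpec_congr hout (fun r i _ =>
            ((covS_absorb_small (by rw [big_iff_len hnd' hmem']; omega)) r i).symm)⟩
        · refine ⟨hVnew, ?_⟩
          have hLne : F.2 ≠ [] := fun h => by
            simpa [h] using (hmem' x).mpr Relation.ReflTransGen.refl
          have hRne : F.2.map (fun q => q.1) ≠ [] := by
            simpa using hLne
          have hCne : F.2.map (fun q => q.2) ≠ [] := by
            simpa using hLne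
          have hbnd : ∀ q ∈ F.2, inB grid q := fun q hq => reach_inB hx ((hmem' q).mp hq)
          have e1 : ∀ rr : Int,
              ((PySem.List.min? (F.2.map (fun q => q.1)) (fun v => v)).getD 0 < rr ↔
                ∃ q, reach grid x q ∧ q.1 < rr) := by
            intro rr
            rw [min_getD_lt hRne rr]
            constructor
            · rintro ⟨y, hy, hlt⟩
              obtain ⟨q, hq, rfl⟩ := List.mem_map.mp hy
              exact ⟨q, (hmem' q).mp hq, hlt⟩
            · rintro ⟨q, hq, hlt⟩
              exact ⟨q.1, List.mem_map.mpr ⟨q, (hmem' q).mpr hq, rfl⟩, hlt⟩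
          have e2 : ∀ rr : Int,
              (rr < (PySem.List.max? (F.2.map (fun q => q.1)) (fun v => v)).getD 0 ↔
                ∃ q, reach grid x q ∧ rr < q.1) := by
            intro rr
            rw [lt_max_getD hRne rr]
            constructor
            · rintro ⟨y, hy, hlt⟩
              obtain ⟨q, hq, rfl⟩ := List.mem_map.mp hy
              exact ⟨q, (hmem' q).mp hq, hlt⟩
            · rintro ⟨q, hq, hlt⟩
              exact ⟨q.1, List.mem_map.mpr ⟨q, (hmem' q).mpr hq, rfl⟩, hlt⟩
          have e3 : ∀ ii : Int,
              ((PySem.List.min? (F.2.map (fun q => q.2)) (fun v => v)).getD 0 < ii ↔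
                ∃ q, reach grid x q ∧ q.2 < ii) := by
            intro ii
            rw [min_getD_lt hCne ii]
            constructor
            · rintro ⟨y, hy, hlt⟩
              obtain ⟨q, hq, rfl⟩ := List.mem_map.mp hy
              exact ⟨q, (hmem' q).mp hq, hlt⟩
            · rintro ⟨q, hq, hlt⟩
              exact ⟨q.2, List.mem_map.mpr ⟨q, (hmem' q).mpr hq, rfl⟩, hlt⟩
          have e4 : ∀ ii : Int,
              (ii < (PySem.List.max? (F.2.map (fun q => q.2)) (fun v => v)).getD 0 ↔
                ∃ q, reach grid x q ∧ ii < q.2) := by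
            intro ii
            rw [lt_max_getD hCne ii]
            constructor
            · rintro ⟨y, hy, hlt⟩
              obtain ⟨q, hq, rfl⟩ := List.mem_map.mp hy
              exact ⟨q, (hmem' q).mp hq, hlt⟩
            · rintro ⟨q, hq, hlt⟩
              exact ⟨q.2, List.mem_map.mpr ⟨q, (hmem' q).mpr hq, rfl⟩, hlt⟩
          have hminRmem := List.mem_map.mp (min_getD_mem hRne)
          have hmaxRmem := List.mem_map.mp (max_getD_mem hRne)
          have hminCmem := List.mem_map.mp (min_getD_mem hCne)
          have hmaxCmem := List.mem_map.mp (max_getD_mem hCne)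
          obtain ⟨hfs, hfv⟩ := fill2_spec hout.1 hW
            ((PySem.List.min? (F.2.map (fun q => q.1)) (fun v => v)).getD 0 + 1)
            ((PySem.List.max? (F.2.map (fun q => q.1)) (fun v => v)).getD 0)
            ((PySem.List.min? (F.2.map (fun q => q.2)) (fun v => v)).getD 0 + 1)
            ((PySem.List.max? (F.2.map (fun q => q.2)) (fun v => v)).getD 0)
            (by
              obtain ⟨q0, h1, h2⟩ := hminRmem
              have := hbnd q0 h1
              unfold inB at this
              omega)
            (by
              obtain ⟨q0, h1, h2⟩ := hminCmem
              have := hbnd q0 h1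
              unfold inB at this
              omega)
            (by
              obtain ⟨q0, h1, h2⟩ := hmaxRmem
              have := hbnd q0 h1
              unfold inB at this
              omega)
            (by
              obtain ⟨q0, h1, h2⟩ := hmaxCmem
              have := hbnd q0 h1
              unfold inB at this
              omega)
          refine ⟨hfs, fun k i hi => ?_⟩
          constructor
          · intro hc
            rw [hfv k i]
            rcases hc with ⟨pp, hpp | rfl, hin, hnz, hbig, hb⟩
            · split_ifs with hbox
              · rfl
              · exact (hout.2 k i hi).1 ⟨pp, hpp, hin, hnz, hbig, hb⟩
            · obtain ⟨⟨q1, hq1, hb1⟩, ⟨q2, hq2, hb2⟩, ⟨q3, hq3, hb3⟩, ⟨q4, hq4, hb4⟩⟩ := hb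
              split_ifs with hbox
              · rfl
              · exfalso
                apply hbox
                refine ⟨?_, ?_, ?_, ?_⟩
                · have := (e1 (k : Int)).mpr ⟨q1, hq1, hb1⟩
                  omega
                · exact (e2 (k : Int)).mpr ⟨q2, hq2, hb2⟩
                · have := (e3 (i : Int)).mpr ⟨q3, hq3, hb3⟩
                  omega
                · exact (e4 (i : Int)).mpr ⟨q4, hq4, hb4⟩
          · intro hc
            rw [hfv k i]
            have hnotbox : ¬((PySem.List.min? (F.2.map (fun q => q.1)) (fun v => v)).getD 0 + 1 ≤ (k : Int) ∧
                (k : Int) < (PySem.List.max? (F.2.map (fun q => q.1)) (fun v => v)).getD 0 ∧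
                (PySem.List.min? (F.2.map (fun q => q.2)) (fun v => v)).getD 0 + 1 ≤ (i : Int) ∧
                (i : Int) < (PySem.List.max? (F.2.map (fun q => q.2)) (fun v => v)).getD 0) := by
              rintro ⟨hb1, hb2, hb3, hb4⟩
              apply hc
              refine ⟨x, Or.inr rfl, hx, hcase.1, ?_, ?_, ?_, ?_, ?_⟩
              · rw [big_iff_len hnd' hmem']
                omega
              · exact (e1 (k : Int)).mp (by omega)
              · exact (e2 (k : Int)).mp hb2
              · exact (e3 (i : Int)).mp (by omega)
              · exact (e4 (i : Int)).mp hb4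
            rw [if_neg hnotbox]
            refine (hout.2 k i hi).2 (fun hold => hc ?_)
            obtain ⟨p, hp, rest⟩ := hold
            exact ⟨p, Or.inl hp, rest⟩
      · -- cell skipped: the state is unchanged
        have hred : scanCell grid grid.length (grid.getD 0 []).length (visited, out) x.1 x.2 =
            (visited, out) := by
          unfold scanCell
          rw [if_neg hcase]
        rw [hred]
        rcases not_and_or.mp hcase with hz | hv
        · -- zero cell
          have hz' : cv grid x = 0 := by
            by_contra h
            exact hz h
          refine ⟨⟨hvinv.1, fun q hq => ?_⟩,
            OutSpec_congr hout (fun r i _ => ((covS_absorb_zero hz') r i).symm)⟩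
          rw [hvinv.2 q hq]
          constructor
          · rintro ⟨s, hs, h3⟩; exact ⟨s, Or.inl hs, h3⟩
          · rintro ⟨s, hs | rfl, h3⟩
            · exact ⟨s, hs, h3⟩
            · exact absurd hz' h3.2.1
        · -- already visited cell: its component was found before
          have hv' : vget visited x.1 x.2 = true := by
            rcases Bool.eq_false_or_eq_true (vget visited x.1 x.2) with h | h
            · exact h
            · exact absurd h hv
          obtain ⟨s0, hs0, h0in, h0nz, h0r⟩ := (hvinv.2 x hx).mp hv'
          refine ⟨⟨hvinv.1, fun q hq => ?_⟩,
            OutSpec_congr hout (fun r i _ => ((covS_absorb hs0 h0in h0nz h0r) r i).symm)⟩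
          rw [hvinv.2 q hq]
          constructor
          · rintro ⟨s, hs, h3⟩; exact ⟨s, Or.inl hs, h3⟩
          · rintro ⟨s, hs | rfl, h3⟩
            · exact ⟨s, hs, h3⟩
            · exact ⟨s0, hs0, h0in, h0nz, reach_trans h0r h3.2.2⟩
    obtain ⟨hV1, hO1⟩ := hstep
    have hrest := ih (fun s => Sc s ∨ s = x) _ _
      (fun y hy => hcs y (List.mem_cons_of_mem _ hy)) hV1 hO1
    refine ⟨VInv_congr (fun s => by rw [List.mem_cons]; tauto) hrest.1,
      OutSpec_congr hrest.2 (fun r i _ => CovS_congr (fun p _ _ => by rw [List.mem_cons]; tauto) r i)⟩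

theorem LA (grid : List (List Int)) (hpre : Pre_solve_50cb2852 grid) :
    OutSpec grid (solve_50cb2852 grid) (Covered grid) := by
  have hW : ∀ k : Nat, k < grid.length → (grid.getD 0 []).length ≤ (grid.getD k []).length := by
    intro k hk
    have hmem : grid.getD k [] ∈ grid := by
      rw [getDk _ _ _ hk]
      exact List.getElem_mem hk
    exact hpre.2 _ hmem
  have h0 := scan_go grid hW (allCells grid) (fun _ => False)
    (List.replicate grid.length (List.replicate (grid.getD 0 []).length false)) grid
    (fun x hx => mem_allCells.mp hx)
    ⟨vshape_replicate grid, fun q hq => by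
      rw [vget_replicate hq]
      constructor
      · intro h; simp at h
      · rintro ⟨s, hs, -⟩; exact absurd hs (by simp)⟩
    ⟨⟨rfl, fun k => rfl⟩, fun r i hi =>
      ⟨fun hc => absurd hc (by rintro ⟨p, hp, -⟩; exact hp), fun _ => rfl⟩⟩
  have heq : solve_50cb2852 grid =
      ((allCells grid).foldl
        (fun st x => scanCell grid grid.length (grid.getD 0 []).length st x.1 x.2)
        (List.replicate grid.length (List.replicate (grid.getD 0 []).length false), grid)).2 := by
    rw [solve_50cb2852, allCells, List.foldl_flatMap]
    simp only [List.foldl_map]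
    rw [show grid.map (fun row => row) = grid from by simp]
  rw [heq]
  exact OutSpec_congr h0.2 (fun r i _ =>
    CovS_congr (fun p hin hnz => by
      simp only [false_or]
      exact ⟨fun _ => trivial, fun _ => mem_allCells.mpr hin⟩) r i)

-- ---------- B-side ----------
def nzCells (grid : List (List Int)) : List (Int × Int) :=
  (allCells grid).filter (fun x => decide (cv grid x ≠ 0))

theorem mem_nzCells {grid : List (List Int)} {x : Int × Int} :
    x ∈ nzCells grid ↔ inB grid x ∧ cv grid x ≠ 0 := by
  simp [nzCells, List.mem_filter, mem_allCells]

theorem nodup_nzCells (grid : List (List Int)) : (nzCells grid).Nodup :=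
  (nodup_allCells grid).filter _

-- pieces of B's definition, named for the proofs (definitionally equal to the port's lets)
def rootF (d : PySem.Dict (Int × Int) (Int × Int)) (x : Int × Int) : Int × Int :=
  d.getD x (0, 0)

def cid0D (grid : List (List Int)) : PySem.Dict (Int × Int) (Int × Int) :=
  (PySem.List.pyRange 0 (grid.length : Int) 1).foldl (fun d r =>
    (PySem.List.pyRange 0 ((grid.getD 0 []).length : Int) 1).foldl (fun d c =>
      if gg grid r c ≠ 0 then d.insert (r, c) (r, c) else d) d)
    PySem.Dict.empty

def cidD (grid : List (List Int)) : PySem.Dict (Int × Int) (Int × Int) :=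
  (cid0D grid).keys.foldl (fun d rc =>
    [(rc.1 + 1, rc.2), (rc.1, rc.2 + 1)].foldl (fun d nb => unionStep grid d rc nb) d) (cid0D grid)

def groupsD (grid : List (List Int)) : PySem.Dict (Int × Int) (List (Int × Int)) :=
  (cidD grid).items.foldl (fun g p => g.modify p.2 [] (· ++ [p.1])) PySem.Dict.empty

def boxesD (grid : List (List Int)) : List (Int × Int × Int × Int) :=
  (groupsD grid).values.foldl (fun bs cells =>
    if 4 ≤ cells.length then
      bs ++ [((PySem.List.min? (cells.map (·.1)) (fun x => x)).getD 0,
              (PySem.List.max? (cells.map (·.1)) (fun x => x)).getD 0,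
              (PySem.List.min? (cells.map (·.2)) (fun x => x)).getD 0,
              (PySem.List.max? (cells.map (·.2)) (fun x => x)).getD 0)]
    else bs) []

def validE (grid : List (List Int)) (e : (Int × Int) × (Int × Int)) : Prop :=
  e.1 ∈ nzCells grid ∧ e.2 ∈ nzCells grid ∧ cv grid e.2 = cv grid e.1

def candRel (grid : List (List Int)) (E : List ((Int × Int) × (Int × Int))) (a b : Int × Int) : Prop :=
  ∃ e ∈ E, validE grid e ∧ ((a, b) = e ∨ (b, a) = e)

theorem candRel_symm (grid : List (List Int)) (E : List ((Int × Int) × (Int × Int))) :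
    Symmetric (candRel grid E) := by
  rintro a b ⟨e, he, hv, h | h⟩
  · exact ⟨e, he, hv, Or.inr h⟩
  · exact ⟨e, he, hv, Or.inl h⟩

theorem rtg_congr {α : Type} {r s : α → α → Prop} (h : ∀ a b, r a b ↔ s a b) {x y : α} :
    Relation.ReflTransGen r x y ↔ Relation.ReflTransGen s x y :=
  ⟨Relation.ReflTransGen.mono (fun a b hab => (h a b).mp hab),
   Relation.ReflTransGen.mono (fun a b hab => (h a b).mpr hab)⟩

theorem candRel_append (grid : List (List Int)) (E : List ((Int × Int) × (Int × Int)))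
    (e : (Int × Int) × (Int × Int)) (a b : Int × Int) :
    candRel grid (E ++ [e]) a b ↔
      candRel grid E a b ∨ (validE grid e ∧ ((a, b) = e ∨ (b, a) = e)) := by
  constructor
  · rintro ⟨e', he', hv, hh⟩
    rcases List.mem_append.mp he' with h | h
    · exact Or.inl ⟨e', h, hv, hh⟩
    · rw [List.mem_singleton.mp h] at hv hh
      exact Or.inr ⟨hv, hh⟩
  · rintro (⟨e', he', hv, hh⟩ | ⟨hv, hh⟩)
    · exact ⟨e', List.mem_append_left _ he', hv, hh⟩
    · exact ⟨e, List.mem_append_right _ (List.mem_singleton_self e), hv, hh⟩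

theorem rtg_append_invalid {grid : List (List Int)} {E : List ((Int × Int) × (Int × Int))}
    {e : (Int × Int) × (Int × Int)} (h : ¬ validE grid e) (x y : Int × Int) :
    Relation.ReflTransGen (candRel grid (E ++ [e])) x y ↔
      Relation.ReflTransGen (candRel grid E) x y :=
  rtg_congr (fun a b => by
    rw [candRel_append]
    constructor
    · rintro (hc | ⟨hv, -⟩)
      · exact hc
      · exact absurd hv h
    · exact Or.inl)

theorem rtg_append_join (grid : List (List Int)) (E : List ((Int × Int) × (Int × Int)))
    (u v : Int × Int) (hval : validE grid (u, v)) (x y : Int × Int) :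
    Relation.ReflTransGen (candRel grid (E ++ [(u, v)])) x y ↔
      (Relation.ReflTransGen (candRel grid E) x y ∨
       (Relation.ReflTransGen (candRel grid E) x u ∧ Relation.ReflTransGen (candRel grid E) v y) ∨
       (Relation.ReflTransGen (candRel grid E) x v ∧ Relation.ReflTransGen (candRel grid E) u y)) := by
  constructor
  · intro h
    induction h with
    | refl => exact Or.inl Relation.ReflTransGen.refl
    | tail hxb hbc ih =>
      rcases (candRel_append grid E (u, v) _ _).mp hbc with hold | ⟨-, hnew⟩
      · rcases ih with h1 | ⟨h1, h2⟩ | ⟨h1, h2⟩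
        · exact Or.inl (h1.tail hold)
        · exact Or.inr (Or.inl ⟨h1, h2.tail hold⟩)
        · exact Or.inr (Or.inr ⟨h1, h2.tail hold⟩)
      · rcases hnew with hbc' | hbc'
        · rw [Prod.mk.injEq] at hbc'
          obtain ⟨rfl, rfl⟩ := hbc'
          rcases ih with h1 | ⟨h1, h2⟩ | ⟨h1, h2⟩
          · exact Or.inr (Or.inl ⟨h1, Relation.ReflTransGen.refl⟩)
          · exact Or.inr (Or.inl ⟨h1, Relation.ReflTransGen.refl⟩)
          · exact Or.inl h1
        · rw [Prod.mk.injEq] at hbc'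
          obtain ⟨rfl, rfl⟩ := hbc'
          rcases ih with h1 | ⟨h1, h2⟩ | ⟨h1, h2⟩
          · exact Or.inr (Or.inr ⟨h1, Relation.ReflTransGen.refl⟩)
          · exact Or.inl h1
          · exact Or.inr (Or.inr ⟨h1, Relation.ReflTransGen.refl⟩)
  · have hlift : ∀ {a b : Int × Int}, Relation.ReflTransGen (candRel grid E) a b →
        Relation.ReflTransGen (candRel grid (E ++ [(u, v)])) a b :=
      fun h => Relation.ReflTransGen.mono
        (fun a b hab => (candRel_append grid E (u, v) a b).mpr (Or.inl hab)) h
    have hedge : Relation.ReflTransGen (candRel grid (E ++ [(u, v)])) u v :=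
      Relation.ReflTransGen.single
        ((candRel_append grid E (u, v) u v).mpr (Or.inr ⟨hval, Or.inl rfl⟩))
    have hedge' : Relation.ReflTransGen (candRel grid (E ++ [(u, v)])) v u :=
      Relation.ReflTransGen.single
        ((candRel_append grid E (u, v) v u).mpr (Or.inr ⟨hval, Or.inr rfl⟩))
    rintro (h | ⟨h1, h2⟩ | ⟨h1, h2⟩)
    · exact hlift h
    · exact ((hlift h1).trans hedge).trans (hlift h2)
    · exact ((hlift h1).trans hedge').trans (hlift h2)

theorem relabel_get? (d : PySem.Dict (Int × Int) (Int × Int)) (a b x : Int × Int) :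
    (relabel d a b).get? x = (d.get? x).map (fun v => if v = a then b else v) := by
  obtain ⟨l⟩ := d
  induction l with
  | nil => rfl
  | cons p rest ih =>
    obtain ⟨k, v⟩ := p
    rw [show relabel (PySem.Dict.mk ((k, v) :: rest)) a b =
        PySem.Dict.mk ((k, if v = a then b else v) ::
          rest.map (fun q => (q.1, if q.2 = a then b else q.2))) from rfl]
    rw [PySem.Dict.get?_mk_cons, PySem.Dict.get?_mk_cons]
    by_cases h : k == x
    · rw [if_pos h, if_pos h]
      rfl
    · rw [if_neg h, if_neg h]
      exact ih

theorem relabel_keys (d : PySem.Dict (Int × Int) (Int × Int)) (a b : Int × Int) :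
    (relabel d a b).keys = d.keys := by
  obtain ⟨l⟩ := d
  show (l.map _).map Prod.fst = l.map Prod.fst
  rw [List.map_map]
  rfl

theorem getD_present {κ ν : Type} [BEq κ] [LawfulBEq κ] (d : PySem.Dict κ ν) (k : κ)
    (h : d.contains k = true) (d1 d2 : ν) : d.getD k d1 = d.getD k d2 := by
  rw [PySem.Dict.getD_eq_get?_getD, PySem.Dict.getD_eq_get?_getD]
  cases hq : d.get? k with
  | none =>
    rw [PySem.Dict.contains_eq_isSome_get?, hq] at h
    simp at h
  | some v => rfl

def UFInv (grid : List (List Int)) (E : List ((Int × Int) × (Int × Int)))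
    (d : PySem.Dict (Int × Int) (Int × Int)) : Prop :=
  d.keys = nzCells grid ∧
  ∀ x ∈ nzCells grid, ∀ y ∈ nzCells grid,
    (rootF d x = rootF d y ↔ Relation.ReflTransGen (candRel grid E) x y)

theorem unionStep_spec {grid : List (List Int)} {E : List ((Int × Int) × (Int × Int))}
    {d : PySem.Dict (Int × Int) (Int × Int)} (rc nb : Int × Int)
    (hrc : rc ∈ nzCells grid) (hinv : UFInv grid E d) :
    UFInv grid (E ++ [(rc, nb)]) (unionStep grid d rc nb) := by
  obtain ⟨hkeys, hroot⟩ := hinv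
  have hcont : ∀ z : Int × Int, d.contains z = true ↔ z ∈ nzCells grid := by
    intro z
    rw [PySem.Dict.contains_iff_mem_keys, hkeys]
  have hS : ∀ {a b : Int × Int}, Relation.ReflTransGen (candRel grid E) a b →
      Relation.ReflTransGen (candRel grid E) b a :=
    fun h => Relation.ReflTransGen.symmetric (candRel_symm grid E) h
  unfold unionStep
  split_ifs with hguard hab
  · -- valid edge between distinct classes: relabel
    obtain ⟨hcnb, hcol⟩ := hguard
    have hnb : nb ∈ nzCells grid := (hcont nb).mp hcnb
    have hval : validE grid (rc, nb) := ⟨hrc, hnb, hcol⟩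
    have hrcC : d.contains rc = true := (hcont rc).mpr hrc
    have ha : d.getD rc rc = rootF d rc := getD_present d rc hrcC rc (0, 0)
    have hb : d.getD nb nb = rootF d nb := getD_present d nb hcnb nb (0, 0)
    have hnewroot : ∀ z ∈ nzCells grid,
        rootF (relabel d (d.getD rc rc) (d.getD nb nb)) z =
          (if rootF d z = rootF d rc then rootF d nb else rootF d z) := by
      intro z hz
      have hzc : d.contains z = true := (hcont z).mpr hz
      rw [rootF, PySem.Dict.getD_eq_get?_getD, relabel_get?]
      cases hq : d.get? z with
      | none =>
        rw [PySem.Dict.contains_eq_isSome_get?, hq] at hzc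
        simp at hzc
      | some v =>
        have hv : rootF d z = v := by
          rw [rootF, PySem.Dict.getD_eq_get?_getD, hq]
          rfl
        rw [Option.map_some, Option.getD_some, ha, hb, ← hv]
    refine ⟨by rw [relabel_keys]; exact hkeys, fun x hx y hy => ?_⟩
    rw [hnewroot x hx, hnewroot y hy, rtg_append_join grid E rc nb hval x y]
    have hxr := hroot x hx rc hrc
    have hyr := hroot y hy rc hrc
    have hnby := hroot nb hnb y hy
    have hxnb := hroot x hx nb hnb
    by_cases h1 : rootF d x = rootF d rc <;> by_cases h2 : rootF d y = rootF d rc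
    · rw [if_pos h1, if_pos h2]
      constructor
      · intro _
        exact Or.inl ((hxr.mp h1).trans (hS (hyr.mp h2)))
      · intro _
        rfl
    · rw [if_pos h1, if_neg h2, hnby]
      constructor
      · intro h
        exact Or.inr (Or.inl ⟨hxr.mp h1, h⟩)
      · rintro (h | ⟨ha1, ha2⟩ | ⟨ha1, ha2⟩)
        · exact absurd (hyr.mpr ((hS h).trans (hxr.mp h1))) h2
        · exact ha2
        · exact absurd (hyr.mpr (hS ha2)) h2
    · rw [if_neg h1, if_pos h2, hxnb]
      constructor
      · intro h
        exact Or.inr (Or.inr ⟨h, hS (hyr.mp h2)⟩)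
      · rintro (h | ⟨ha1, ha2⟩ | ⟨ha1, ha2⟩)
        · exact absurd (hxr.mpr (h.trans (hyr.mp h2))) h1
        · exact absurd (hxr.mpr ha1) h1
        · exact ha1
    · rw [if_neg h1, if_neg h2, hroot x hx y hy]
      constructor
      · exact Or.inl
      · rintro (h | ⟨ha1, ha2⟩ | ⟨ha1, ha2⟩)
        · exact h
        · exact absurd (hxr.mpr ha1) h1
        · exact absurd (hyr.mpr (hS ha2)) h2
  · -- valid edge inside one class: closure unchanged
    obtain ⟨hcnb, hcol⟩ := hguard
    have hnb : nb ∈ nzCells grid := (hcont nb).mp hcnb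
    have hrel : Relation.ReflTransGen (candRel grid E) rc nb := by
      have ha : d.getD rc rc = rootF d rc := getD_present d rc ((hcont rc).mpr hrc) rc (0, 0)
      have hb : d.getD nb nb = rootF d nb := getD_present d nb hcnb nb (0, 0)
      have heq : rootF d rc = rootF d nb := by
        rw [← ha, ← hb]
        exact not_not.mp hab
      exact (hroot rc hrc nb hnb).mp heq
    refine ⟨hkeys, fun x hx y hy => ?_⟩
    rw [hroot x hx y hy, rtg_append_join grid E rc nb ⟨hrc, hnb, hcol⟩ x y]
    constructor
    · exact Or.inl
    · rintro (h | ⟨h1', h2'⟩ | ⟨h1', h2'⟩)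
      · exact h
      · exact (h1'.trans hrel).trans h2'
      · exact (h1'.trans (hS hrel)).trans h2'
  · -- not an edge
    have hnval : ¬ validE grid (rc, nb) := by
      intro hv
      exact hguard ⟨(hcont nb).mpr hv.2.1, hv.2.2⟩
    refine ⟨hkeys, fun x hx y hy => ?_⟩
    rw [hroot x hx y hy]
    exact (rtg_append_invalid hnval x y).symm

theorem union_fold (grid : List (List Int)) :
    ∀ (cs : List (Int × Int)) (E : List ((Int × Int) × (Int × Int)))
      (d : PySem.Dict (Int × Int) (Int × Int)),
      (∀ x ∈ cs, x ∈ nzCells grid) → UFInv grid E d →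
      UFInv grid (E ++ cs.flatMap (fun rc => [(rc, (rc.1 + 1, rc.2)), (rc, (rc.1, rc.2 + 1))]))
        (cs.foldl (fun d rc => [(rc.1 + 1, rc.2), (rc.1, rc.2 + 1)].foldl
          (fun d nb => unionStep grid d rc nb) d) d) := by
  intro cs
  induction cs with
  | nil =>
    intro E d _ h
    simpa using h
  | cons rc cs ih =>
    intro E d hmem hinv
    have h1 := unionStep_spec rc (rc.1 + 1, rc.2) (hmem rc (List.mem_cons_self ..)) hinv
    have h2 := unionStep_spec rc (rc.1, rc.2 + 1) (hmem rc (List.mem_cons_self ..)) h1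
    have h3 := ih ((E ++ [(rc, (rc.1 + 1, rc.2))]) ++ [(rc, (rc.1, rc.2 + 1))]) _
      (fun x hx => hmem x (List.mem_cons_of_mem _ hx)) h2
    rw [List.foldl_cons]
    have hE : E ++ (rc :: cs).flatMap (fun rc => [(rc, (rc.1 + 1, rc.2)), (rc, (rc.1, rc.2 + 1))]) =
        ((E ++ [(rc, (rc.1 + 1, rc.2))]) ++ [(rc, (rc.1, rc.2 + 1))]) ++
          cs.flatMap (fun rc => [(rc, (rc.1 + 1, rc.2)), (rc, (rc.1, rc.2 + 1))]) := by
      simp [List.flatMap_cons, List.append_assoc]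
    rw [hE]
    exact h3

theorem rtg_nil_iff {grid : List (List Int)} {x y : Int × Int} :
    Relation.ReflTransGen (candRel grid []) x y ↔ x = y := by
  constructor
  · intro h
    induction h with
    | refl => rfl
    | tail _ hbc ih =>
      obtain ⟨e, he, -⟩ := hbc
      simp at he
  · rintro rfl
    exact Relation.ReflTransGen.refl

theorem cand_full_iff (grid : List (List Int)) (a b : Int × Int) :
    candRel grid ((nzCells grid).flatMap (fun rc => [(rc, (rc.1 + 1, rc.2)), (rc, (rc.1, rc.2 + 1))])) a b
      ↔ stepR grid a b := by
  constructor
  · rintro ⟨e, he, ⟨hv1, hv2, hv3⟩, hh⟩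
    obtain ⟨rc, hrc, he'⟩ := List.mem_flatMap.mp he
    have hstep : stepR grid e.1 e.2 := by
      obtain ⟨h1a, h1b⟩ := mem_nzCells.mp hv1
      obtain ⟨h2a, h2b⟩ := mem_nzCells.mp hv2
      rcases List.mem_cons.mp he' with rfl | he''
      · exact ⟨h1a, h2a, h1b, hv3, Or.inr ⟨rfl, Or.inl rfl⟩⟩
      · rw [List.mem_singleton] at he''
        subst he''
        exact ⟨h1a, h2a, h1b, hv3, Or.inl ⟨rfl, Or.inl rfl⟩⟩
    rcases hh with hh | hh
    · rw [Prod.ext_iff] at hh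
      simp only at hh
      rw [hh.1, hh.2]
      exact hstep
    · rw [Prod.ext_iff] at hh
      simp only at hh
      rw [hh.1, hh.2]
      exact stepR_symm grid hstep
  · intro h
    obtain ⟨h1, h2, h3, h4, hadj⟩ := h
    have hanz : a ∈ nzCells grid := mem_nzCells.mpr ⟨h1, h3⟩
    have hbnz : b ∈ nzCells grid := mem_nzCells.mpr ⟨h2, by rw [h4]; exact h3⟩
    rcases hadj with ⟨ha, hb | hb⟩ | ⟨ha, hb | hb⟩
    · -- b is right of a
      have hbe : ((a.1, a.2 + 1) : Int × Int) = b := by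
        rw [Prod.ext_iff]
        exact ⟨ha.symm, hb.symm⟩
      refine ⟨(a, (a.1, a.2 + 1)), List.mem_flatMap.mpr ⟨a, hanz, by simp⟩,
        ⟨hanz, by rw [hbe]; exact hbnz, by rw [hbe]; exact h4⟩, Or.inl ?_⟩
      rw [Prod.ext_iff]
      exact ⟨rfl, hbe.symm⟩
    · -- b is left of a
      have hbe : ((b.1, b.2 + 1) : Int × Int) = a := by
        rw [Prod.ext_iff]
        constructor
        · exact ha
        · simp only
          omega
      refine ⟨(b, (b.1, b.2 + 1)), List.mem_flatMap.mpr ⟨b, hbnz, by simp⟩,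
        ⟨hbnz, by rw [hbe]; exact hanz, by rw [hbe, h4]⟩, Or.inr ?_⟩
      rw [Prod.ext_iff]
      exact ⟨rfl, hbe.symm⟩
    · -- b is below a
      have hbe : ((a.1 + 1, a.2) : Int × Int) = b := by
        rw [Prod.ext_iff]
        exact ⟨hb.symm, ha.symm⟩
      refine ⟨(a, (a.1 + 1, a.2)), List.mem_flatMap.mpr ⟨a, hanz, by simp⟩,
        ⟨hanz, by rw [hbe]; exact hbnz, by rw [hbe]; exact h4⟩, Or.inl ?_⟩
      rw [Prod.ext_iff]
      exact ⟨rfl, hbe.symm⟩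
    · -- b is above a
      have hbe : ((b.1 + 1, b.2) : Int × Int) = a := by
        rw [Prod.ext_iff]
        constructor
        · simp only
          omega
        · exact ha
      refine ⟨(b, (b.1 + 1, b.2)), List.mem_flatMap.mpr ⟨b, hbnz, by simp⟩,
        ⟨hbnz, by rw [hbe]; exact hanz, by rw [hbe, h4]⟩, Or.inr ?_⟩
      rw [Prod.ext_iff]
      exact ⟨rfl, hbe.symm⟩

theorem cid0_flat (grid : List (List Int)) :
    cid0D grid = (nzCells grid).foldl (fun d x => d.insert x x) PySem.Dict.empty := by
  have h1 : cid0D grid =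
      (allCells grid).foldl (fun d x => if cv grid x ≠ 0 then d.insert x x else d)
        PySem.Dict.empty := by
    unfold cid0D
    rw [allCells, List.foldl_flatMap]
    simp only [List.foldl_map]
    rfl
  rw [h1, nzCells]
  exact PySem.List.foldl_ite_eq_foldl_filter _ _ _ _

theorem cid0_keys (grid : List (List Int)) : (cid0D grid).keys = nzCells grid := by
  rw [cid0_flat, PySem.Dict.keys_foldl_insert, PySem.Dict.keys_empty,
    PySem.Set.update_nil_left]
  exact PySem.Set.ofList_eq_self_of_nodup _ (nodup_nzCells grid)

theorem cid0_root (grid : List (List Int)) :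
    ∀ x ∈ nzCells grid, rootF (cid0D grid) x = x := by
  intro x hx
  have hitems : (cid0D grid).items = (nzCells grid).map (fun a => (a, a)) := by
    rw [cid0_flat]
    have h := PySem.Dict.items_foldl_insert_fresh (l := nzCells grid)
      (k := fun a => a) (v := fun a => a) (d := PySem.Dict.empty)
      (by intro a _; exact PySem.Dict.contains_empty a)
      (by simpa using nodup_nzCells grid)
    simpa using h
  have hmem : (x, x) ∈ (cid0D grid).items := by
    rw [hitems]
    exact List.mem_map.mpr ⟨x, hx, rfl⟩
  exact PySem.Dict.getD_of_mem_items _ hmem (by rw [cid0_keys]; exact nodup_nzCells grid) _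

theorem cid_inv (grid : List (List Int)) :
    UFInv grid ((nzCells grid).flatMap (fun rc => [(rc, (rc.1 + 1, rc.2)), (rc, (rc.1, rc.2 + 1))]))
      (cidD grid) := by
  have h0 : UFInv grid [] (cid0D grid) :=
    ⟨cid0_keys grid, fun x hx y hy => by
      rw [cid0_root grid x hx, cid0_root grid y hy, rtg_nil_iff]⟩
  have h := union_fold grid (cid0D grid).keys [] (cid0D grid)
    (by rw [cid0_keys]; exact fun x h => h) h0
  rw [List.nil_append, cid0_keys grid] at h
  unfold cidD
  rw [cid0_keys grid]
  exact h

theorem cid_keys (grid : List (List Int)) : (cidD grid).keys = nzCells grid :=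
  (cid_inv grid).1

theorem cid_iff (grid : List (List Int)) :
    ∀ x ∈ nzCells grid, ∀ y ∈ nzCells grid,
      (rootF (cidD grid) x = rootF (cidD grid) y ↔ reach grid x y) := by
  intro x hx y hy
  rw [(cid_inv grid).2 x hx y hy]
  exact rtg_congr (cand_full_iff grid)

def classOf (grid : List (List Int)) (ρ : Int × Int) : List (Int × Int) :=
  (nzCells grid).filter (fun x => rootF (cidD grid) x == ρ)

theorem mem_classOf {grid : List (List Int)} {ρ x : Int × Int} :
    x ∈ classOf grid ρ ↔ x ∈ nzCells grid ∧ rootF (cidD grid) x = ρ := by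
  simp [classOf, List.mem_filter]

theorem classOf_reach (grid : List (List Int)) (p : Int × Int) (hp : p ∈ nzCells grid) :
    ∀ x, x ∈ classOf grid (rootF (cidD grid) p) ↔ reach grid p x := by
  intro x
  rw [mem_classOf]
  constructor
  · rintro ⟨hx, hr⟩
    exact reach_symm ((cid_iff grid x hx p hp).mp (by rw [hr]))
  · intro hr
    have hx : x ∈ nzCells grid := mem_nzCells.mpr
      ⟨reach_inB (mem_nzCells.mp hp).1 hr, reach_nz (mem_nzCells.mp hp).2 hr⟩
    exact ⟨hx, (cid_iff grid x hx p hp).mpr (reach_symm hr)⟩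

theorem nodup_classOf (grid : List (List Int)) (ρ : Int × Int) : (classOf grid ρ).Nodup :=
  (nodup_nzCells grid).filter _

theorem cid_items (grid : List (List Int)) :
    (cidD grid).items = (nzCells grid).map (fun k => (k, rootF (cidD grid) k)) := by
  have h := PySem.Dict.items_eq_map_keys (cidD grid)
    (by rw [cid_keys]; exact nodup_nzCells grid) ((0 : Int), (0 : Int))
  rw [h, cid_keys]
  rfl

theorem groups_getD (grid : List (List Int)) (ρ : Int × Int) :
    (groupsD grid).getD ρ [] = classOf grid ρ := by
  have h1 : groupsD grid =
      ((cidD grid).items.map Prod.swap).foldl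
        (fun g p => g.modify p.1 [] (· ++ [p.2])) PySem.Dict.empty := by
    rw [List.foldl_map]
    rfl
  rw [h1, PySem.Dict.getD_foldl_modify_append, PySem.Dict.getD_empty, cid_items,
    List.map_map, List.filter_map, List.map_map, List.nil_append]
  rw [show ((fun x : (Int × Int) × (Int × Int) => x.2) ∘ Prod.swap ∘
      fun k : Int × Int => (k, rootF (cidD grid) k)) = (fun k : Int × Int => k) from rfl]
  rw [show ((fun p : (Int × Int) × (Int × Int) => p.1 == ρ) ∘ Prod.swap ∘
      fun k : Int × Int => (k, rootF (cidD grid) k)) = (fun k : Int × Int => rootF (cidD grid) k == ρ) from rfl]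
  rw [List.map_id']
  rfl

theorem groups_values (grid : List (List Int)) :
    (groupsD grid).values =
      (PySem.Set.ofList ((cidD grid).items.map (fun p => p.2))).map (fun ρ => classOf grid ρ) := by
  have hkeys : (groupsD grid).keys = PySem.Set.ofList ((cidD grid).items.map (fun p => p.2)) := by
    unfold groupsD
    rw [PySem.Dict.keys_foldl_modify_key, PySem.Dict.keys_empty, PySem.Set.update_nil_left]
  have hnd : (groupsD grid).keys.Nodup := by
    rw [hkeys]
    exact PySem.Set.nodup_ofList _
  rw [PySem.Dict.values_eq_map_keys (groupsD grid) hnd [], hkeys]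
  exact List.map_congr_left (fun ρ _ => groups_getD grid ρ)

theorem boxesD_eq (grid : List (List Int)) :
    boxesD grid =
      ((groupsD grid).values.filter (fun cells => decide (4 ≤ cells.length))).map
        (fun cells => ((PySem.List.min? (cells.map (·.1)) (fun x => x)).getD 0,
                       (PySem.List.max? (cells.map (·.1)) (fun x => x)).getD 0,
                       (PySem.List.min? (cells.map (·.2)) (fun x => x)).getD 0,
                       (PySem.List.max? (cells.map (·.2)) (fun x => x)).getD 0)) := by
  unfold boxesD
  rw [PySem.List.foldl_append_ite, List.nil_append]

theorem bounds_iff (grid : List (List Int)) (p : Int × Int) (L : List (Int × Int)) (hne : L ≠ [])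
    (hmem : ∀ x, x ∈ L ↔ reach grid p x) (r i : Int) :
    ((PySem.List.min? (L.map (·.1)) (fun x => x)).getD 0 < r ∧
     r < (PySem.List.max? (L.map (·.1)) (fun x => x)).getD 0 ∧
     (PySem.List.min? (L.map (·.2)) (fun x => x)).getD 0 < i ∧
     i < (PySem.List.max? (L.map (·.2)) (fun x => x)).getD 0) ↔
    ((∃ q, reach grid p q ∧ q.1 < r) ∧ (∃ q, reach grid p q ∧ r < q.1) ∧
     (∃ q, reach grid p q ∧ q.2 < i) ∧ (∃ q, reach grid p q ∧ i < q.2)) := by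
  have hRne : L.map (fun q : Int × Int => q.1) ≠ [] := by simpa using hne
  have hCne : L.map (fun q : Int × Int => q.2) ≠ [] := by simpa using hne
  have c1 : ((PySem.List.min? (L.map (·.1)) (fun x => x)).getD 0 < r ↔ ∃ q, reach grid p q ∧ q.1 < r) := by
    rw [min_getD_lt hRne r]
    constructor
    · rintro ⟨y, hy, hlt⟩
      obtain ⟨q, hq, rfl⟩ := List.mem_map.mp hy
      exact ⟨q, (hmem q).mp hq, hlt⟩
    · rintro ⟨q, hq, hlt⟩
      exact ⟨q.1, List.mem_map.mpr ⟨q, (hmem q).mpr hq, rfl⟩, hlt⟩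
  have c2 : (r < (PySem.List.max? (L.map (·.1)) (fun x => x)).getD 0 ↔ ∃ q, reach grid p q ∧ r < q.1) := by
    rw [lt_max_getD hRne r]
    constructor
    · rintro ⟨y, hy, hlt⟩
      obtain ⟨q, hq, rfl⟩ := List.mem_map.mp hy
      exact ⟨q, (hmem q).mp hq, hlt⟩
    · rintro ⟨q, hq, hlt⟩
      exact ⟨q.1, List.mem_map.mpr ⟨q, (hmem q).mpr hq, rfl⟩, hlt⟩
  have c3 : ((PySem.List.min? (L.map (·.2)) (fun x => x)).getD 0 < i ↔ ∃ q, reach grid p q ∧ q.2 < i) := by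
    rw [min_getD_lt hCne i]
    constructor
    · rintro ⟨y, hy, hlt⟩
      obtain ⟨q, hq, rfl⟩ := List.mem_map.mp hy
      exact ⟨q, (hmem q).mp hq, hlt⟩
    · rintro ⟨q, hq, hlt⟩
      exact ⟨q.2, List.mem_map.mpr ⟨q, (hmem q).mpr hq, rfl⟩, hlt⟩
  have c4 : (i < (PySem.List.max? (L.map (·.2)) (fun x => x)).getD 0 ↔ ∃ q, reach grid p q ∧ i < q.2) := by
    rw [lt_max_getD hCne i]
    constructor
    · rintro ⟨y, hy, hlt⟩
      obtain ⟨q, hq, rfl⟩ := List.mem_map.mp hy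
      exact ⟨q, (hmem q).mp hq, hlt⟩
    · rintro ⟨q, hq, hlt⟩
      exact ⟨q.2, List.mem_map.mpr ⟨q, (hmem q).mpr hq, rfl⟩, hlt⟩
  rw [c1, c2, c3, c4]

theorem boxes_iff (grid : List (List Int)) :
    ∀ r i : Int,
      (∃ b ∈ boxesD grid, b.1 < r ∧ r < b.2.1 ∧ b.2.2.1 < i ∧ i < b.2.2.2) ↔ Covered grid r i := by
  intro r i
  rw [boxesD_eq]
  constructor
  · rintro ⟨b, hb, hin⟩
    obtain ⟨cells, hcells, rfl⟩ := List.mem_map.mp hb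
    obtain ⟨hcv, hclen⟩ := List.mem_filter.mp hcells
    rw [decide_eq_true_iff] at hclen
    rw [groups_values] at hcv
    obtain ⟨ρ, hρ, rfl⟩ := List.mem_map.mp hcv
    obtain ⟨pr, hpr, rfl⟩ := List.mem_map.mp ((PySem.Set.mem_ofList _ _).mp hρ)
    rw [cid_items] at hpr
    obtain ⟨p, hpnz, rfl⟩ := List.mem_map.mp hpr
    have hmemiff := classOf_reach grid p hpnz
    have hnd := nodup_classOf grid (rootF (cidD grid) p)
    have hne : classOf grid (rootF (cidD grid) p) ≠ [] := by
      intro h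
      rw [h] at hclen
      simp at hclen
    simp only at hin
    have hbounds := (bounds_iff grid p (classOf grid (rootF (cidD grid) p)) hne hmemiff r i).mp hin
    exact ⟨p, trivial, (mem_nzCells.mp hpnz).1, (mem_nzCells.mp hpnz).2,
      (big_iff_len hnd hmemiff).mpr hclen, hbounds.1, hbounds.2.1, hbounds.2.2.1, hbounds.2.2.2⟩
  · rintro ⟨p, -, hinb, hnz, hbig, hb1, hb2, hb3, hb4⟩
    have hpnz : p ∈ nzCells grid := mem_nzCells.mpr ⟨hinb, hnz⟩
    have hmemiff := classOf_reach grid p hpnz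
    have hnd := nodup_classOf grid (rootF (cidD grid) p)
    have hlen : 4 ≤ (classOf grid (rootF (cidD grid) p)).length := (big_iff_len hnd hmemiff).mp hbig
    have hne : classOf grid (rootF (cidD grid) p) ≠ [] := by
      intro h
      rw [h] at hlen
      simp at hlen
    refine ⟨_, List.mem_map.mpr ⟨classOf grid (rootF (cidD grid) p), List.mem_filter.mpr ⟨?_, by simp [hlen]⟩, rfl⟩, ?_⟩
    · rw [groups_values]
      refine List.mem_map.mpr ⟨rootF (cidD grid) p, (PySem.Set.mem_ofList _ _).mpr ?_, rfl⟩
      rw [cid_items]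
      exact List.mem_map.mpr ⟨(p, rootF (cidD grid) p), List.mem_map.mpr ⟨p, hpnz, rfl⟩, rfl⟩
    · simp only
      exact (bounds_iff grid p (classOf grid (rootF (cidD grid) p)) hne hmemiff r i).mpr
        ⟨hb1, hb2, hb3, hb4⟩

theorem outB_spec (grid : List (List Int)) (boxes : List (Int × Int × Int × Int))
    (hiff : ∀ r i : Int,
      (∃ b ∈ boxes, b.1 < r ∧ r < b.2.1 ∧ b.2.2.1 < i ∧ i < b.2.2.2) ↔ Covered grid r i) :
    OutSpec grid
      ((PySem.List.enumerate grid 0).map (fun rrow =>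
        (PySem.List.enumerate rrow.2 0).map (fun iv =>
          if boxes.any (fun b =>
              decide (b.1 < rrow.1 ∧ rrow.1 < b.2.1 ∧ b.2.2.1 < iv.1 ∧ iv.1 < b.2.2.2)) then 8
          else iv.2)))
      (Covered grid) := by
  have hrow : ∀ (k : Nat) (hk : k < grid.length),
      (((PySem.List.enumerate grid 0).map (fun rrow =>
        (PySem.List.enumerate rrow.2 0).map (fun iv =>
          if boxes.any (fun b =>
              decide (b.1 < rrow.1 ∧ rrow.1 < b.2.1 ∧ b.2.2.1 < iv.1 ∧ iv.1 < b.2.2.2)) then 8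
          else iv.2))).getD k []) =
        (PySem.List.enumerate grid[k] 0).map (fun iv =>
          if boxes.any (fun b =>
              decide (b.1 < ((0 : Int) + k) ∧ ((0 : Int) + k) < b.2.1 ∧ b.2.2.1 < iv.1 ∧ iv.1 < b.2.2.2)) then 8
          else iv.2) := by
    intro k hk
    rw [getDk _ _ k (by rw [List.length_map, PySem.List.length_enumerate]; exact hk),
      List.getElem_map, PySem.List.getElem_enumerate]
  refine ⟨⟨by rw [List.length_map, PySem.List.length_enumerate], fun k => ?_⟩, ?_⟩
  · by_cases hk : k < grid.length
    · rw [hrow k hk, List.length_map, PySem.List.length_enumerate, getDk grid [] k hk]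
    · rw [List.getD_eq_getElem?_getD,
        List.getElem?_eq_none (by rw [List.length_map, PySem.List.length_enumerate]; omega),
        List.getD_eq_getElem?_getD (l := grid), List.getElem?_eq_none (by omega)]
  · intro rr ii hi
    have hr : rr < grid.length := by
      by_contra hcon
      rw [List.getD_eq_getElem?_getD, List.getElem?_eq_none (by omega)] at hi
      simp at hi
    have hi' : ii < grid[rr].length := by
      rw [getDk grid [] rr hr] at hi
      exact hi
    have hval : ((((PySem.List.enumerate grid 0).map (fun rrow =>
        (PySem.List.enumerate rrow.2 0).map (fun iv =>
          if boxes.any (fun b =>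
              decide (b.1 < rrow.1 ∧ rrow.1 < b.2.1 ∧ b.2.2.1 < iv.1 ∧ iv.1 < b.2.2.2)) then 8
          else iv.2))).getD rr []).getD ii 0) =
        if boxes.any (fun b =>
            decide (b.1 < (rr : Int) ∧ (rr : Int) < b.2.1 ∧ b.2.2.1 < (ii : Int) ∧ (ii : Int) < b.2.2.2)) then 8
        else grid[rr][ii] := by
      rw [hrow rr hr,
        getDk _ _ ii (by rw [List.length_map, PySem.List.length_enumerate]; exact hi'),
        List.getElem_map, PySem.List.getElem_enumerate]
      simp only [zero_add]
    constructor
    · intro hc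
      rw [hval, if_pos (List.any_eq_true.mpr (by
        obtain ⟨b, hb, hx⟩ := (hiff rr ii).mpr hc
        exact ⟨b, hb, decide_eq_true hx⟩))]
    · intro hc
      rw [hval, if_neg (fun hany => hc ((hiff rr ii).mp (by
          obtain ⟨b, hb, hdec⟩ := List.any_eq_true.mp hany
          exact ⟨b, hb, of_decide_eq_true hdec⟩))),
        getDk grid [] rr hr, getDk grid[rr] 0 ii hi']

theorem LB (grid : List (List Int)) (_hpre : Pre_solve_50cb2852 grid) :
    OutSpec grid (solve_50cb2852_alt grid) (Covered grid) :=
  outB_spec grid (boxesD grid) (boxes_iff grid)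


-- ===== VERDICT (by name: the statement is the Claim_ definition above) =====
theorem solve_50cb2852_spec : Claim_equal_solve_50cb2852 := by
  intro grid _ hpre
  unfold Spec_solve_50cb2852
  exact outspec_unique (LA grid hpre) (LB grid hpre)
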